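/-
  THE ARENA LAYER (INVARIANTS §2: AR1–AR7, ADO; detailed source design/I6.md §4).

  stb_vorbis carves every allocation out of ONE caller-supplied buffer `[B, B + L)`:

        B                B+S                          B+T                              B+L
        | rz | setup 1 | rz | setup 2 | …  |   free gap   | temp j | rz | … | temp 1 | rz |
          32   r8 n1     32   r8 n2                         r8 mj    32       r8 m1    32

  SETUP blocks grow upwards from offset 0 (`setup_malloc`; never released: `setup_free` returns at once), each with a 32-byte red
  zone BEFORE it; TEMP blocks grow downwards from `L` (`setup_temp_malloc`; released LIFO by `setup_temp_free`, or all at once down to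
  a saved mark by `arena_temp_restore`), each with a 32-byte red zone AFTER it. Sizes are rounded up to a multiple of 8
  (`r8 n = (n + 7) & ~7`) for the LAYOUT; `arena_unpoison` is called with the EXACT size, so the last, partial granule of a block
  has shadow value `n % 8` and the `r8 n - n` padding bytes are not accessible.

  The GHOST STATE `Arena` records `B L S T` and the two lists of live blocks (offset, exact size). `ArenaOK A others mem f` says:

      AR1   B, L aligned, the arena below the shadow         AR1x  (FINDING, see the report) the arena lies in the data space and
      AR2   S ≤ T ≤ L, both multiples of 8                         off the stack: needed to add an arena block to Q0's `ShadowInv`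
      AR3   the setup blocks form a chain from 0 to S        AR4   the temp blocks form a chain (a STACK) from T to L
      AR5   the four fields of `*f` hold B, L, S, T  (`ArenaFields`; the only clause that reads memory)
      AR6   every block is one of the live objects `others`   AR6x  (FINDING) every OTHER live object lies outside `[B, B + L)`
      AR7   is a relation between two arenas: `Arena.Extends` (setup blocks are for ever, S never decreases)

  HOW IT MEETS THE SHADOW LAYER (Q0: Asan/Objects.lean, Asan/Stack.lean). `others : List Obj` is the ghost list of Q0's
  `ShadowInv others frames top mem`: the live objects that are not stack objects. An arena block IS an object (`Arena.setupObj`,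
  `Arena.tempObj`, kinds `.setup` / `.temp`); AR6 puts it into `others`, so `ShadowOK.obj` covers it and every check site inside it
  is `acc_of_obj` with `ArenaOK.block_live`. ArenaOK itself says NOTHING about shadow bytes. What an allocator does to the shadow is
  Q0's `ShadowInv.unpoison` / `.poison`; their side conditions (alignment, range, off the stack, no granule shared with a live
  object, which objects survive) are exactly the lemmas `ArenaOK.newSetup_*`, `newTemp_*`, `drop_*` below; Vorbis/ArenaShadow.lean
  puts the two together (`ArenaOK.shadow_setup_malloc` …, and the check-site forms `block_acc_inv` / `tblock_acc_inv`).

  WHAT A WORKER OF AN ALLOCATOR FUNCTION DOES: walk the machine code to the final memory; show AR5 for the new arena from the one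
  store (`ArenaFields.store_setup` / `.store_temp` + `.frame`); apply the TRANSITION lemma of the function:

      setup_malloc        ArenaOK.setup_malloc      A.pushSetup n        others' = A.newSetupObj n :: others     needs A.Fits n
      setup_temp_malloc   ArenaOK.temp_malloc       A.pushTemp n         others' = A.newTempObj n :: others      needs A.Fits n
      setup_temp_free     ArenaOK.temp_free         A.withTemp (T + r8 m + 32) rest       others' = dropObjs [top] others      (LIFO)
      arena_temp_restore  ArenaOK.temp_restore      A.withTemp p keep                      others' = dropObjs dead others
      setup_free          nothing changes           vorbis_alloc = setup_malloc 1808 (`ArenaOK.vorbis_alloc_fits`, `ADO.of_vorbis_alloc`)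
      vorbis_init         ArenaOK.init              temp_alloc_save = a read of T (AR5)
  `A.Fits n` (`S + 32 + r8 n ≤ T`) is the success condition of BOTH allocators for `0 ≤ sz = n` (remedy R: the guard
  `sz < 0 || sz > T - S` refuses only requests that do not fit: `Arena.not_fits_of_guard`; the compiled temp test
  `T - r8 n - 31 ≤ S` is its negation: `Arena.fits_iff_compiled`).

  DECODE TIME. `ADO` (ArenaDecodeOK): no temp block outstanding, `T = L`, `S + tmr + 32 ≤ L`; `temp_alloc_ok`: a request with
  `r8 n ≤ tmr` fits; `ADO.alloc` → `ADOBusy` (one block) → `ADOBusy.restore` → `ADO` again.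

  VIEWS AND PERMANENCE. `A.Block p n` / `A.TBlock p n` = `Block(p, n)` / `TBlock(p, n)` of INVARIANTS.md; `ArenaOK.block_live`,
  `block_acc`, `block_range`, `block_off`, `block_disjoint`; `ArenaOK.setups_permanent` with `Arena.Extends` (AR7).
  SIMP SET `varena`: the fields of `A.pushSetup n`, `A.pushTemp n`, `A.withTemp T' keep` in terms of `A`'s.
  THE AGES OF THE BLOCKS (§9). A ghost SNAPSHOT is an earlier value `A'` of the ghost arena; `Since A' A` = the setup blocks of `A`
  allocated after it. A block of `A'.Blk` and a block of `Since A' A` are DIFFERENT, hence disjoint, blocks (`Since.ne_old`,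
  `ArenaOK.old_disjoint_since`): a store into a block under construction keeps every block of the snapshot
  (`ArenaOK.kept_of_store_since`, `allKept_of_since`); `ArenaOK.since_pushSetup` establishes it at the allocating call.

  CONVENTIONS (Vorbis/Fields.lean): offsets, sizes, addresses are `Nat`; the C `int` fields are read as `Int` by the accessors, AR5
  equates them with the casts of the ghost numbers.
-/
import Asan.Objects
import Vorbis.Fields
import Vorbis.ArenaAttr
namespace Vorbis
open X86 X86.User Asan

/-! ### 1. Rounding to a multiple of 8 -/

/-- `r8 n = (n + 7) & ~7`: the size of a block in the arena's LAYOUT (the accessible part is the exact `n`). -/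
def r8 (n : Nat) : Nat := (n + 7) / 8 * 8

/-- The form `omega` works with. -/
theorem r8_def (n : Nat) : r8 n = (n + 7) / 8 * 8 := id rfl

/-- A rounded size is a multiple of 8. -/
theorem r8_mod (n : Nat) : r8 n % 8 = 0 := by
  rw [r8_def]
  omega

/-- Rounding does not shrink. -/
theorem le_r8 (n : Nat) : n ≤ r8 n := by
  rw [r8_def]
  omega

/-- Rounding adds less than 8. -/
theorem r8_lt (n : Nat) : r8 n < n + 8 := by
  rw [r8_def]
  omega

/-- A multiple of 8 is not changed (1808, `2 * n`, `8 * C * (1 + part_read)`: every decode-time request). -/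
theorem r8_of_mod (n : Nat) (h : n % 8 = 0) : r8 n = n := by
  rw [r8_def]
  omega

/-- Rounding is monotone. -/
theorem r8_mono {n m : Nat} (h : n ≤ m) : r8 n ≤ r8 m := by
  rw [r8_def, r8_def]
  omega

/-- A request below a multiple of 8 stays below it after rounding (`n ≤ tmr`, `tmr % 8 = 0` ⇒ `r8 n ≤ tmr`: T3 ⇒ `temp_alloc_ok`). -/
theorem r8_le_of_le {n m : Nat} (h : n ≤ m) (hm : m % 8 = 0) : r8 n ≤ m := by
  rw [r8_def]
  omega

/-- Equal exact sizes up to rounding: the LIFO condition `r8 sz = r8 m` of `setup_temp_free` holds for equal sizes. -/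
theorem r8_congr {n m : Nat} (h : n = m) : r8 n = r8 m := by
  rw [h]

/-- The mask `~7` on a 32-bit number: clears the three low bits. -/
theorem land_mask8 (x : Nat) (hx : x < 2 ^ 32) : x &&& 0xFFFFFFF8 = x / 8 * 8 := by
  have hbits : ∀ i, i < 32 → Nat.testBit 0xFFFFFFF8 i = decide (3 ≤ i) := by decide
  apply Nat.eq_of_testBit_eq
  intro i
  have e : x / 8 * 8 = (x >>> 3) <<< 3 := by
    rw [Nat.shiftRight_eq_div_pow, Nat.shiftLeft_eq]
  rw [e, Nat.testBit_and, Nat.testBit_shiftLeft, Nat.testBit_shiftRight]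
  by_cases hi : i < 32
  · rw [hbits i hi]
    by_cases h3 : 3 ≤ i
    · have e2 : 3 + (i - 3) = i := by omega
      simp only [h3, decide_true, Bool.and_true, Bool.true_and, e2]
    · simp only [h3, decide_false, Bool.and_false, Bool.false_and]
  · have hlt : x < 2 ^ i := Nat.lt_of_lt_of_le hx (Nat.pow_le_pow_right (by decide) (by omega))
    have h3 : 3 ≤ i := by omega
    have e2 : 3 + (i - 3) = i := by omega
    rw [Nat.testBit_lt_two_pow hlt]
    simp only [Bool.false_and, h3, decide_true, e2, Bool.true_and]
    exact (Nat.testBit_lt_two_pow hlt).symm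

/-- **The machine's rounding** `lea r32, [sz + 7] ; and r32, 0xfffffff8` is `r8`, for a size that passed FIX A's first test
(`cmp esi, 0x7ffffff8 ; ja`). -/
theorem r8_bv (x : BitVec 32) (h : x.toNat ≤ 0x7FFFFFF8) : ((x + 7#32) &&& 0xFFFFFFF8#32).toNat = r8 x.toNat := by
  have e1 : (x + 7#32).toNat = x.toNat + 7 := by
    rw [BitVec.toNat_add]
    have e7 : (7#32).toNat = 7 := by decide
    rw [e7]
    omega
  have e2 : (0xFFFFFFF8#32).toNat = 0xFFFFFFF8 := by decide
  rw [BitVec.toNat_and, e1, e2, land_mask8 _ (by omega), r8_def]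

/-! ### 2. The ghost state, and the two chains -/

/-- **The ghost state of the arena** (INVARIANTS §2): the buffer `[B, B + L)`, the two offsets, and the live blocks as
(offset, EXACT size): `setups` in allocation order, `temps` innermost (lowest, most recent) first. -/
structure Arena where
  /-- `alloc_buffer` -/
  B : Nat
  /-- `alloc_buffer_length_in_bytes` (after `&= ~7`) -/
  L : Nat
  /-- `setup_offset` -/
  S : Nat
  /-- `temp_offset` -/
  T : Nat
  /-- the live setup blocks, oldest first -/
  setups : List (Nat × Nat)
  /-- the live temp blocks, innermost first: a stack whose top is the head -/
  temps : List (Nat × Nat)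

/-- **AR3 as a recursive predicate**: the blocks of the list start 32 bytes (the red zone) after the end `s` of what is below them,
each takes `r8 n` bytes, and the last one ends at `e`. `SetupChain 0 A.setups A.S`. -/
def SetupChain : Nat → List (Nat × Nat) → Nat → Prop
  | s, [], e => e = s
  | s, b :: rest, e => b.1 = s + 32 ∧ SetupChain (b.1 + r8 b.2) rest e

/-- **AR4 as a recursive predicate**: the innermost block starts at `t`; above each block's `r8 n` bytes and its 32-byte red zone
the next one starts; the outermost red zone ends at `top`. `TempChain A.T A.temps A.L`. -/
def TempChain : Nat → List (Nat × Nat) → Nat → Prop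
  | t, [], top => t = top
  | t, b :: rest, top => b.1 = t ∧ TempChain (b.1 + r8 b.2 + 32) rest top

namespace SetupChain

/-- The chain only grows. -/
theorem le {s e : Nat} {l : List (Nat × Nat)} (h : SetupChain s l e) : s ≤ e := by
  induction l generalizing s with
  | nil =>
    simp only [SetupChain] at h
    omega
  | cons b rest ih =>
    simp only [SetupChain] at h
    have := ih h.2
    omega

/-- **Where a block of the chain lies**: behind its red zone, and wholly below the end. -/
theorem mem {s e : Nat} {l : List (Nat × Nat)} (h : SetupChain s l e) {b : Nat × Nat} (hb : b ∈ l) :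
    s + 32 ≤ b.1 ∧ b.1 + r8 b.2 ≤ e := by
  induction l generalizing s with
  | nil => cases hb
  | cons c rest ih =>
    simp only [SetupChain] at h
    rcases List.mem_cons.mp hb with rfl | hr
    · have := h.2.le
      omega
    · have := ih h.2 hr
      omega

/-- Every block of a chain that starts on a granule starts on a granule, and the chain ends on one. -/
theorem aligned {s e : Nat} {l : List (Nat × Nat)} (h : SetupChain s l e) (hs : s % 8 = 0) :
    e % 8 = 0 ∧ ∀ b, b ∈ l → b.1 % 8 = 0 := by
  induction l generalizing s with
  | nil =>
    simp only [SetupChain] at h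
    refine ⟨by omega, ?_⟩
    intro b hb
    cases hb
  | cons c rest ih =>
    simp only [SetupChain] at h
    have hr := r8_mod c.2
    have := ih h.2 (by omega)
    refine ⟨this.1, ?_⟩
    intro b hb
    rcases List.mem_cons.mp hb with rfl | hin
    · omega
    · exact this.2 b hin

/-- **`setup_malloc`: one more block at the end.** -/
theorem snoc {s e : Nat} {l : List (Nat × Nat)} (h : SetupChain s l e) (n : Nat) :
    SetupChain s (l ++ [(e + 32, n)]) (e + 32 + r8 n) := by
  induction l generalizing s with
  | nil =>
    simp only [SetupChain] at h
    simp only [List.nil_append, SetupChain]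
    subst h
    exact ⟨rfl, trivial⟩
  | cons c rest ih =>
    simp only [SetupChain] at h
    simp only [List.cons_append, SetupChain]
    exact ⟨h.1, ih h.2⟩

/-- **Two blocks of a chain are the same or apart** by at least the red zone. -/
theorem apart {s e : Nat} {l : List (Nat × Nat)} (h : SetupChain s l e) {b c : Nat × Nat} (hb : b ∈ l) (hc : c ∈ l) :
    b = c ∨ b.1 + r8 b.2 + 32 ≤ c.1 ∨ c.1 + r8 c.2 + 32 ≤ b.1 := by
  induction l generalizing s with
  | nil => cases hb
  | cons d rest ih =>
    simp only [SetupChain] at h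
    rcases List.mem_cons.mp hb with rfl | hb'
    · rcases List.mem_cons.mp hc with rfl | hc'
      · exact Or.inl rfl
      · have := h.2.mem hc'
        omega
    · rcases List.mem_cons.mp hc with rfl | hc'
      · have := h.2.mem hb'
        omega
      · exact ih h.2 hb' hc'

end SetupChain

namespace TempChain

/-- The chain ends above its start. -/
theorem le {t top : Nat} {l : List (Nat × Nat)} (h : TempChain t l top) : t ≤ top := by
  induction l generalizing t with
  | nil =>
    simp only [TempChain] at h
    omega
  | cons b rest ih =>
    simp only [TempChain] at h
    have := ih h.2
    omega

/-- **Where a block of the chain lies**: at or above the start, its red zone ends at or below the top. -/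
theorem mem {t top : Nat} {l : List (Nat × Nat)} (h : TempChain t l top) {b : Nat × Nat} (hb : b ∈ l) :
    t ≤ b.1 ∧ b.1 + r8 b.2 + 32 ≤ top := by
  induction l generalizing t with
  | nil => cases hb
  | cons c rest ih =>
    simp only [TempChain] at h
    rcases List.mem_cons.mp hb with rfl | hr
    · have := h.2.le
      omega
    · have := ih h.2 hr
      omega

/-- Every block of a chain that ends on a granule starts on a granule, and so does the chain. -/
theorem aligned {t top : Nat} {l : List (Nat × Nat)} (h : TempChain t l top) (htop : top % 8 = 0) :
    t % 8 = 0 ∧ ∀ b, b ∈ l → b.1 % 8 = 0 := by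
  induction l generalizing t with
  | nil =>
    simp only [TempChain] at h
    refine ⟨by omega, ?_⟩
    intro b hb
    cases hb
  | cons c rest ih =>
    simp only [TempChain] at h
    have hr := r8_mod c.2
    have := ih h.2
    refine ⟨by omega, ?_⟩
    intro b hb
    rcases List.mem_cons.mp hb with rfl | hin
    · omega
    · exact this.2 b hin

/-- **Two blocks of a chain are the same or apart** by at least the red zone. -/
theorem apart {t top : Nat} {l : List (Nat × Nat)} (h : TempChain t l top) {b c : Nat × Nat} (hb : b ∈ l) (hc : c ∈ l) :
    b = c ∨ b.1 + r8 b.2 + 32 ≤ c.1 ∨ c.1 + r8 c.2 + 32 ≤ b.1 := by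
  induction l generalizing t with
  | nil => cases hb
  | cons d rest ih =>
    simp only [TempChain] at h
    rcases List.mem_cons.mp hb with rfl | hb'
    · rcases List.mem_cons.mp hc with rfl | hc'
      · exact Or.inl rfl
      · have := h.2.mem hc'
        omega
    · rcases List.mem_cons.mp hc with rfl | hc'
      · have := h.2.mem hb'
        omega
      · exact ih h.2 hb' hc'

/-- **A chain splits at any of its cut points**: the innermost blocks `dead` end where the others `keep` begin. -/
theorem append_iff {t top : Nat} {dead keep : List (Nat × Nat)} :
    TempChain t (dead ++ keep) top ↔ ∃ p, TempChain t dead p ∧ TempChain p keep top := by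
  induction dead generalizing t with
  | nil =>
    simp only [List.nil_append, TempChain]
    constructor
    · intro h
      exact ⟨t, rfl, h⟩
    · intro h
      obtain ⟨p, hp, hk⟩ := h
      rw [hp]
      exact hk
  | cons c rest ih =>
    simp only [List.cons_append, TempChain]
    constructor
    · intro h
      obtain ⟨p, hp, hk⟩ := ih.mp h.2
      exact ⟨p, ⟨h.1, hp⟩, hk⟩
    · intro h
      obtain ⟨p, hp, hk⟩ := h
      exact ⟨hp.1, ih.mpr ⟨p, hp.2, hk⟩⟩

end TempChain

/-! ### 3. The blocks as objects of the shadow layer, and the views `Block` / `TBlock` -/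

namespace Arena

/-- The object of a setup block `(offset, size)`: `size` accessible bytes at `B + offset`. -/
def setupObj (A : Arena) (b : Nat × Nat) : Obj := ⟨A.B + b.1, b.2, .setup⟩

/-- The object of a temp block. -/
def tempObj (A : Arena) (b : Nat × Nat) : Obj := ⟨A.B + b.1, b.2, .temp⟩

/-- The live setup blocks as objects. -/
def setupObjs (A : Arena) : List Obj := A.setups.map A.setupObj

/-- The live temp blocks as objects. -/
def tempObjs (A : Arena) : List Obj := A.temps.map A.tempObj

/-- **The arena's contribution to the live set.** -/
def objs (A : Arena) : List Obj := A.setupObjs ++ A.tempObjs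

/-- **`Block(p, n)` of INVARIANTS.md**: `p` is the base of a live SETUP block of exactly `n` bytes. What every SHAPE clause of the
decoder layer says of a pointer field. (`p ≠ 0`: `ArenaOK.block_ne_zero`.) -/
def Block (A : Arena) (p n : Nat) : Prop := ∃ o, (o, n) ∈ A.setups ∧ p = A.B + o

/-- **`TBlock(p, n)`**: `p` is the base of a live TEMP block of exactly `n` bytes. -/
def TBlock (A : Arena) (p n : Nat) : Prop := ∃ o, (o, n) ∈ A.temps ∧ p = A.B + o

/-- A setup block's object is one of the arena's objects. -/
theorem Block.obj_mem {A : Arena} {p n : Nat} (h : A.Block p n) : (⟨p, n, .setup⟩ : Obj) ∈ A.objs := by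
  obtain ⟨o, ho, hp⟩ := h
  apply List.mem_append_left
  unfold setupObjs
  apply List.mem_map.mpr
  refine ⟨(o, n), ho, ?_⟩
  unfold setupObj
  rw [hp]

/-- A temp block's object is one of the arena's objects. -/
theorem TBlock.obj_mem {A : Arena} {p n : Nat} (h : A.TBlock p n) : (⟨p, n, .temp⟩ : Obj) ∈ A.objs := by
  obtain ⟨o, ho, hp⟩ := h
  apply List.mem_append_right
  unfold tempObjs
  apply List.mem_map.mpr
  refine ⟨(o, n), ho, ?_⟩
  unfold tempObj
  rw [hp]

/-- An object of the arena is a setup block or a temp block. -/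
theorem mem_objs {A : Arena} {o : Obj} (h : o ∈ A.objs) :
    (∃ b, b ∈ A.setups ∧ o = A.setupObj b) ∨ (∃ b, b ∈ A.temps ∧ o = A.tempObj b) := by
  unfold objs at h
  rcases List.mem_append.mp h with hs | ht
  · left
    unfold setupObjs at hs
    obtain ⟨b, hb, e⟩ := List.mem_map.mp hs
    exact ⟨b, hb, e.symm⟩
  · right
    unfold tempObjs at ht
    obtain ⟨b, hb, e⟩ := List.mem_map.mp ht
    exact ⟨b, hb, e.symm⟩

/-- **The success condition of both allocators** for a request of `n ≥ 0` bytes (remedy R: the original exact-fit test decides):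
`S + 32 + r8 n ≤ T`. For `setup_temp_malloc` the same inequality reads `S ≤ T - r8 n - 32`. -/
def Fits (A : Arena) (n : Nat) : Prop := A.S + 32 + r8 n ≤ A.T

instance (A : Arena) (n : Nat) : Decidable (A.Fits n) := by
  unfold Fits
  infer_instance

/-- **FIX A's guard refuses only what does not fit**: `sz > temp_offset - setup_offset` ⇒ the exact test would fail too. -/
theorem not_fits_of_guard (A : Arena) (n : Nat) (h : (A.T : Int) - A.S < n) : ¬ A.Fits n := by
  unfold Fits
  have := le_r8 n
  omega

/-- **The compiled test of `setup_temp_malloc`** (`r15d = T - r8 sz - 31 ; cmp r15d, S ; jle → NULL`, gcc's form of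
`T - sz - 32 < S`) **is the negation of `Fits`**, as integers (nothing wraps after the guard: `ArenaOK.bounds`). -/
theorem fits_iff_compiled (A : Arena) (n : Nat) : A.Fits n ↔ ¬ ((A.T : Int) - r8 n - 31 ≤ A.S) := by
  unfold Fits
  omega

/-- **The compiled test of `setup_malloc`** (`r15d = S + r8 sz + 32 ; cmp r15d, T ; jg → NULL`). -/
theorem fits_iff_compiled_setup (A : Arena) (n : Nat) : A.Fits n ↔ ¬ ((A.T : Int) < (A.S : Int) + r8 n + 32) := by
  unfold Fits
  omega

/-- **After a successful `setup_malloc(f, n)`**: `S' = S + 32 + r8 n`, the new block `(S + 32, n)` at the END of `setups`. -/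
def pushSetup (A : Arena) (n : Nat) : Arena :=
  { A with S := A.S + 32 + r8 n, setups := A.setups ++ [(A.S + 32, n)] }

/-- **After a successful `setup_temp_malloc(f, n)`**: `T' = T - r8 n - 32`, the new block `(T', n)` on TOP of `temps`. -/
def pushTemp (A : Arena) (n : Nat) : Arena :=
  { A with T := A.T - (r8 n + 32), temps := (A.T - (r8 n + 32), n) :: A.temps }

/-- **After a release of temp blocks** (`setup_temp_free`: the top one; `arena_temp_restore`: all below the mark): the new
`temp_offset` and the blocks that stay. -/
def withTemp (A : Arena) (T' : Nat) (keep : List (Nat × Nat)) : Arena :=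
  { A with T := T', temps := keep }

/-- The object `setup_malloc(f, n)` adds: `n` bytes at `B + S + 32`. -/
def newSetupObj (A : Arena) (n : Nat) : Obj := A.setupObj (A.S + 32, n)

/-- The object `setup_temp_malloc(f, n)` adds: `n` bytes at `B + T - r8 n - 32`. -/
def newTempObj (A : Arena) (n : Nat) : Obj := A.tempObj (A.T - (r8 n + 32), n)

/-! The fields after a transition (`simp only [varena]`). -/

/-- `setup_malloc` keeps the buffer. -/
@[varena] theorem pushSetup_B (A : Arena) (n : Nat) : (A.pushSetup n).B = A.B := id rfl
/-- `setup_malloc` keeps the length. -/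
@[varena] theorem pushSetup_L (A : Arena) (n : Nat) : (A.pushSetup n).L = A.L := id rfl
/-- `setup_malloc`: the new `setup_offset`. -/
@[varena] theorem pushSetup_S (A : Arena) (n : Nat) : (A.pushSetup n).S = A.S + 32 + r8 n := id rfl
/-- `setup_malloc` keeps `temp_offset`. -/
@[varena] theorem pushSetup_T (A : Arena) (n : Nat) : (A.pushSetup n).T = A.T := id rfl
/-- `setup_malloc`: the new block at the end. -/
@[varena] theorem pushSetup_setups (A : Arena) (n : Nat) : (A.pushSetup n).setups = A.setups ++ [(A.S + 32, n)] := id rfl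
/-- `setup_malloc` keeps the temp blocks. -/
@[varena] theorem pushSetup_temps (A : Arena) (n : Nat) : (A.pushSetup n).temps = A.temps := id rfl

/-- `setup_temp_malloc` keeps the buffer. -/
@[varena] theorem pushTemp_B (A : Arena) (n : Nat) : (A.pushTemp n).B = A.B := id rfl
/-- `setup_temp_malloc` keeps the length. -/
@[varena] theorem pushTemp_L (A : Arena) (n : Nat) : (A.pushTemp n).L = A.L := id rfl
/-- `setup_temp_malloc` keeps `setup_offset`. -/
@[varena] theorem pushTemp_S (A : Arena) (n : Nat) : (A.pushTemp n).S = A.S := id rfl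
/-- `setup_temp_malloc`: the new `temp_offset`. -/
@[varena] theorem pushTemp_T (A : Arena) (n : Nat) : (A.pushTemp n).T = A.T - (r8 n + 32) := id rfl
/-- `setup_temp_malloc` keeps the setup blocks. -/
@[varena] theorem pushTemp_setups (A : Arena) (n : Nat) : (A.pushTemp n).setups = A.setups := id rfl
/-- `setup_temp_malloc`: the new block on top. -/
@[varena] theorem pushTemp_temps (A : Arena) (n : Nat) :
    (A.pushTemp n).temps = (A.T - (r8 n + 32), n) :: A.temps := id rfl

/-- A release keeps the buffer. -/
@[varena] theorem withTemp_B (A : Arena) (T' : Nat) (keep : List (Nat × Nat)) : (A.withTemp T' keep).B = A.B := id rfl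
/-- A release keeps the length. -/
@[varena] theorem withTemp_L (A : Arena) (T' : Nat) (keep : List (Nat × Nat)) : (A.withTemp T' keep).L = A.L := id rfl
/-- A release keeps `setup_offset`. -/
@[varena] theorem withTemp_S (A : Arena) (T' : Nat) (keep : List (Nat × Nat)) : (A.withTemp T' keep).S = A.S := id rfl
/-- A release: the new `temp_offset`. -/
@[varena] theorem withTemp_T (A : Arena) (T' : Nat) (keep : List (Nat × Nat)) : (A.withTemp T' keep).T = T' := id rfl
/-- A release keeps the setup blocks. -/
@[varena] theorem withTemp_setups (A : Arena) (T' : Nat) (keep : List (Nat × Nat)) :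
    (A.withTemp T' keep).setups = A.setups := id rfl
/-- A release: the temp blocks that stay. -/
@[varena] theorem withTemp_temps (A : Arena) (T' : Nat) (keep : List (Nat × Nat)) : (A.withTemp T' keep).temps = keep := id rfl

/-- **AR7 (monotone), as a relation between an earlier and a later arena**: the same buffer, `S` has not decreased, and the earlier
setup blocks are still there, in place (later ones were appended). Every transition below yields it. -/
structure Extends (A A' : Arena) : Prop where
  B : A'.B = A.B
  L : A'.L = A.L
  S : A.S ≤ A'.S
  setups : ∃ more, A'.setups = A.setups ++ more

/-- Nothing happened. -/
theorem Extends.refl (A : Arena) : A.Extends A :=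
  ⟨rfl, rfl, Nat.le_refl _, [], (List.append_nil _).symm⟩

/-- AR7 composes over any sequence of allocator calls. -/
theorem Extends.trans {A A' A'' : Arena} (h1 : A.Extends A') (h2 : A'.Extends A'') : A.Extends A'' := by
  obtain ⟨m1, e1⟩ := h1.setups
  obtain ⟨m2, e2⟩ := h2.setups
  refine ⟨by rw [h2.B, h1.B], by rw [h2.L, h1.L], Nat.le_trans h1.S h2.S, m1 ++ m2, ?_⟩
  rw [e2, e1, List.append_assoc]

/-- **`setups_permanent`, the ghost half: a setup block of the earlier arena is a setup block of the later one** (same base, same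
size). With `ArenaOK.block_live` for the later state: it is still live. -/
theorem Block.mono {A A' : Arena} {p n : Nat} (h : A.Block p n) (he : A.Extends A') : A'.Block p n := by
  obtain ⟨o, ho, hp⟩ := h
  obtain ⟨more, e⟩ := he.setups
  refine ⟨o, ?_, ?_⟩
  · rw [e]
    exact List.mem_append_left _ ho
  · rw [he.B]
    exact hp

/-- AR7 for `setup_malloc`. -/
theorem extends_pushSetup (A : Arena) (n : Nat) : A.Extends (A.pushSetup n) :=
  ⟨rfl, rfl, by unfold pushSetup; simp only; omega, [(A.S + 32, n)], rfl⟩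

/-- AR7 for `setup_temp_malloc`. -/
theorem extends_pushTemp (A : Arena) (n : Nat) : A.Extends (A.pushTemp n) :=
  ⟨rfl, rfl, Nat.le_refl _, [], (List.append_nil _).symm⟩

/-- AR7 for `setup_temp_free` / `arena_temp_restore`. -/
theorem extends_withTemp (A : Arena) (T' : Nat) (keep : List (Nat × Nat)) : A.Extends (A.withTemp T' keep) :=
  ⟨rfl, rfl, Nat.le_refl _, [], (List.append_nil _).symm⟩

/-- The block `setup_malloc` returned is a `Block` of the new arena. -/
theorem block_pushSetup (A : Arena) (n : Nat) : (A.pushSetup n).Block (A.B + (A.S + 32)) n :=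
  ⟨A.S + 32, List.mem_append_right _ List.mem_cons_self, rfl⟩

/-- The block `setup_temp_malloc` returned is a `TBlock` of the new arena. -/
theorem tblock_pushTemp (A : Arena) (n : Nat) : (A.pushTemp n).TBlock (A.B + (A.T - (r8 n + 32))) n :=
  ⟨A.T - (r8 n + 32), List.mem_cons_self, rfl⟩

/-- **LIFO**: releasing the block just allocated, with a size that rounds the same, gives the arena back. -/
theorem pushTemp_pop (A : Arena) (n sz : Nat) (hfit : A.Fits n) (hsz : r8 sz = r8 n) :
    (A.pushTemp n).withTemp ((A.pushTemp n).T + r8 sz + 32) A.temps = A := by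
  unfold Fits at hfit
  unfold pushTemp withTemp
  cases A
  simp only [Arena.mk.injEq, true_and, and_true]
  simp only at hfit
  omega

end Arena

/-- The live objects without the released ones (`setup_temp_free`: the top temp block; `arena_temp_restore`: those below the mark). -/
def dropObjs (dead others : List Obj) : List Obj := others.filter (fun o => decide (o ∉ dead))

/-- What is left: the objects that were live and are not released. -/
theorem mem_dropObjs {dead others : List Obj} {o : Obj} : o ∈ dropObjs dead others ↔ o ∈ others ∧ o ∉ dead := by
  unfold dropObjs
  rw [List.mem_filter, decide_eq_true_iff]

/-- What is left is a sublist (the form Q0's `ShadowInv.poison` asks for). -/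
theorem dropObjs_sublist (dead others : List Obj) : (dropObjs dead others).Sublist others :=
  List.filter_sublist

/-- Dropping objects none of which is in the list changes nothing. -/
theorem dropObjs_of_not_mem {dead others : List Obj} (h : ∀ o, o ∈ dead → o ∉ others) : dropObjs dead others = others := by
  unfold dropObjs
  apply List.filter_eq_self.mpr
  intro o ho
  rw [decide_eq_true_iff]
  intro hd
  exact h o hd ho

/-- **Allocate, then release**: the list of live objects is what it was, if the new object was not in it. -/
theorem dropObjs_cons_self {o : Obj} {others : List Obj} (h : o ∉ others) : dropObjs [o] (o :: others) = others := by
  unfold dropObjs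
  rw [List.filter_cons]
  have e : decide (o ∉ [o]) = false := by
    rw [decide_eq_false_iff_not]
    intro hn
    exact hn List.mem_cons_self
  rw [e]
  simp only [Bool.false_eq_true, if_false]
  apply List.filter_eq_self.mpr
  intro x hx
  rw [decide_eq_true_iff]
  intro hd
  rw [List.mem_singleton.mp hd] at hx
  exact h hx

/-! ### 4. The invariant -/

/-- **AR5: the four fields of `*f`** hold the ghost numbers. The ONLY clause of the arena layer that reads memory. `f` is `&p` (a
stack object of `stb_vorbis_open_memory`) until `*f = p`, the arena copy afterwards: `ArenaOK.move`. -/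
structure ArenaFields (A : Arena) (mem : Mem) (f : Nat) : Prop where
  buffer : stb_vorbis.alloc.alloc_buffer mem f = A.B
  length : stb_vorbis.alloc.alloc_buffer_length_in_bytes mem f = (A.L : Int)
  setup : stb_vorbis.setup_offset mem f = (A.S : Int)
  temp : stb_vorbis.temp_offset mem f = (A.T : Int)

/-- **`ArenaOK A others mem f`: AR1–AR6 of INVARIANTS.md** for the ghost arena `A`, the ghost list `others` of the live objects that
are not stack objects (Q0's `ShadowInv others …`), and the decoder object at `f`. (AR7 is `Arena.Extends`.) -/
structure ArenaOK (A : Arena) (others : List Obj) (mem : Mem) (f : Nat) : Prop where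
  /-- AR1: `B % 8 = 0`, `0 < B`, `L % 8 = 0`, `B + L ≤ C00000H` (the theorem: B = 800000H, L = 400000H) -/
  AR1 : A.B % 8 = 0 ∧ 0 < A.B ∧ A.L % 8 = 0 ∧ A.B + A.L ≤ 0xC00000
  /-- AR1x (FINDING: not in INVARIANTS.md): the arena lies in the data space and does not meet the stack region -/
  AR1x : 0x100000 ≤ A.B ∧ (A.B + A.L ≤ 0x700000 ∨ 0x800000 ≤ A.B)
  /-- AR2: `0 ≤ S ≤ T ≤ L`, both multiples of 8 -/
  AR2 : A.S ≤ A.T ∧ A.T ≤ A.L ∧ A.S % 8 = 0 ∧ A.T % 8 = 0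
  /-- AR3: the setup blocks: `o₁ = 32`, `o_{i+1} = o_i + r8 n_i + 32`, `S = o_k + r8 n_k` -/
  AR3 : SetupChain 0 A.setups A.S
  /-- AR4: the temp blocks, a stack: `T = t_j`, `t_i + r8 m_i + 32 = t_{i-1}`, `t_1 + r8 m_1 + 32 = L` -/
  AR4 : TempChain A.T A.temps A.L
  /-- AR5: the four fields in memory -/
  AR5 : ArenaFields A mem f
  /-- AR6: every block is a live object (so `ShadowOK.obj` covers it, with its EXACT size) -/
  AR6 : ∀ o, o ∈ A.objs → o ∈ others
  /-- AR6x (FINDING: not in INVARIANTS.md): the live objects of kind `setup` / `temp` are the arena's blocks, and every other live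
  object lies outside the arena -/
  AR6x : ∀ o, o ∈ others →
    o ∈ A.objs ∨ (o.kind ≠ .setup ∧ o.kind ≠ .temp ∧ (o.base + o.size ≤ A.B ∨ A.B + A.L ≤ o.base))

/-- **What is left of the arena layer after an error return of `start_decoder`** (INVARIANTS §5, SD.ERR): AR1 and AR6 restricted to
the setup blocks. `vorbis_deinit` needs no more: it loads through pointers into setup blocks and allocates nothing. -/
structure ArenaErr (A : Arena) (others : List Obj) : Prop where
  AR1 : A.B % 8 = 0 ∧ 0 < A.B ∧ A.L % 8 = 0 ∧ A.B + A.L ≤ 0xC00000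
  AR6s : ∀ o, o ∈ A.setupObjs → o ∈ others

namespace ArenaFields
variable {A : Arena} {mem mem' : Mem} {f : Nat}

/-- **FRAME of AR5**: the 24 bytes `[f + 112, f + 136)` read the same. -/
theorem frame (h : ArenaFields A mem f) (hf : f + Off.sizeof.stb_vorbis ≤ 2 ^ 64)
    (hs : Mem.EqOn (f + Off.stb_vorbis.alloc) (f + Off.stb_vorbis.temp_offset + 4) mem mem') : ArenaFields A mem' f := by
  obtain ⟨h1, h2, h3, h4⟩ := h
  simp only [voff] at hf hs
  simp only [vacc, voff] at h1 h2 h3 h4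
  constructor
  · simp only [vacc, voff]
    rw [hs.u64 _ (by omega) (by omega) (by omega)]
    exact h1
  · simp only [vacc, voff]
    rw [hs.i32 _ (by omega) (by omega) (by omega)]
    exact h2
  · simp only [vacc, voff]
    rw [hs.i32 _ (by omega) (by omega) (by omega)]
    exact h3
  · simp only [vacc, voff]
    rw [hs.i32 _ (by omega) (by omega) (by omega)]
    exact h4

/-- FRAME of AR5 from the whole decoder object. -/
theorem frame_obj (h : ArenaFields A mem f) (hf : f + Off.sizeof.stb_vorbis ≤ 2 ^ 64)
    (hs : (Vorbis.Block.mk f Off.sizeof.stb_vorbis).Same mem mem') : ArenaFields A mem' f := by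
  apply h.frame hf
  simp only [vblock, voff] at hs ⊢
  exact Mem.EqOn.mono hs (by omega) (by omega)

/-- The arena state is a function of the four fields: the same fields, the same `B L S T`. -/
theorem change (h : ArenaFields A mem f) (A' : Arena) (hB : A'.B = A.B) (hL : A'.L = A.L) (hS : A'.S = A.S) (hT : A'.T = A.T) :
    ArenaFields A' mem f := by
  obtain ⟨h1, h2, h3, h4⟩ := h
  exact ⟨by rw [hB]; exact h1, by rw [hL]; exact h2, by rw [hS]; exact h3, by rw [hT]; exact h4⟩

/-- **AR5 after `setup_offset` changed**: the other three fields read the same, the field holds the new `S`. (The general form: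
the final memory of a walk differs from the entry memory by pushes, the store, the shadow stores of `arena_unpoison`.) -/
theorem set_setup (h : ArenaFields A mem f) (hf : f + Off.sizeof.stb_vorbis ≤ 2 ^ 64) (A' : Arena) (hB : A'.B = A.B)
    (hL : A'.L = A.L) (hT : A'.T = A.T)
    (hs1 : Mem.EqOn (f + Off.stb_vorbis.alloc) (f + Off.stb_vorbis.setup_offset) mem mem')
    (hs2 : Mem.EqOn (f + Off.stb_vorbis.temp_offset) (f + Off.stb_vorbis.temp_offset + 4) mem mem')
    (hS : stb_vorbis.setup_offset mem' f = (A'.S : Int)) : ArenaFields A' mem' f := by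
  obtain ⟨h1, h2, h3, h4⟩ := h
  simp only [voff] at hf hs1 hs2
  simp only [vacc, voff] at h1 h2 h3 h4
  constructor
  · simp only [vacc, voff]
    rw [hs1.u64 _ (by omega) (by omega) (by omega), hB]
    exact h1
  · simp only [vacc, voff]
    rw [hs1.i32 _ (by omega) (by omega) (by omega), hL]
    exact h2
  · exact hS
  · simp only [vacc, voff]
    rw [hs2.i32 _ (by omega) (by omega) (by omega), hT]
    exact h4

/-- **AR5 after `temp_offset` changed**: the other three fields read the same, the field holds the new `T`. -/
theorem set_temp (h : ArenaFields A mem f) (hf : f + Off.sizeof.stb_vorbis ≤ 2 ^ 64) (A' : Arena) (hB : A'.B = A.B)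
    (hL : A'.L = A.L) (hS : A'.S = A.S)
    (hs : Mem.EqOn (f + Off.stb_vorbis.alloc) (f + Off.stb_vorbis.temp_offset) mem mem')
    (hT : stb_vorbis.temp_offset mem' f = (A'.T : Int)) : ArenaFields A' mem' f := by
  obtain ⟨h1, h2, h3, h4⟩ := h
  simp only [voff] at hf hs
  simp only [vacc, voff] at h1 h2 h3 h4
  constructor
  · simp only [vacc, voff]
    rw [hs.u64 _ (by omega) (by omega) (by omega), hB]
    exact h1
  · simp only [vacc, voff]
    rw [hs.i32 _ (by omega) (by omega) (by omega), hL]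
    exact h2
  · simp only [vacc, voff]
    rw [hs.i32 _ (by omega) (by omega) (by omega), hS]
    exact h3
  · exact hT

/-- **The store of `setup_malloc`**: `mov [f + 128], r32` with the new `setup_offset` (a number below `2^31`). -/
theorem store_setup (h : ArenaFields A mem f) (hf : f + Off.sizeof.stb_vorbis ≤ 2 ^ 64) (A' : Arena) (hB : A'.B = A.B)
    (hL : A'.L = A.L) (hT : A'.T = A.T) (hS : A'.S < 2 ^ 31) :
    ArenaFields A' (mem.writeLE (addr (f + Off.stb_vorbis.setup_offset)) 4 A'.S) f := by
  obtain ⟨h1, h2, h3, h4⟩ := h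
  simp only [voff] at hf ⊢
  simp only [vacc, voff] at h1 h2 h3 h4
  have ea : (addr (f + 128)).toNat = f + 128 := toNat_addr _ (by omega)
  constructor
  · simp only [vacc, voff]
    rw [mem.u64_writeLE _ 4 _ _ (by omega) (by omega) (by omega), hB]
    exact h1
  · simp only [vacc, voff]
    rw [mem.i32_writeLE _ 4 _ _ (by omega) (by omega) (by omega), hL]
    exact h2
  · simp only [vacc, voff]
    rw [mem.i32_writeLE_same]
    have hm : A'.S % 2 ^ 32 = A'.S := Nat.mod_eq_of_lt (by omega)
    rw [hm]
    have := sint32_cases A'.S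
    omega
  · simp only [vacc, voff]
    rw [mem.i32_writeLE _ 4 _ _ (by omega) (by omega) (by omega), hT]
    exact h4

/-- **The store of `setup_temp_malloc` / `setup_temp_free` / `arena_temp_restore`**: `mov [f + 132], r32` with the new
`temp_offset`. -/
theorem store_temp (h : ArenaFields A mem f) (hf : f + Off.sizeof.stb_vorbis ≤ 2 ^ 64) (A' : Arena) (hB : A'.B = A.B)
    (hL : A'.L = A.L) (hS : A'.S = A.S) (hT : A'.T < 2 ^ 31) :
    ArenaFields A' (mem.writeLE (addr (f + Off.stb_vorbis.temp_offset)) 4 A'.T) f := by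
  obtain ⟨h1, h2, h3, h4⟩ := h
  simp only [voff] at hf ⊢
  simp only [vacc, voff] at h1 h2 h3 h4
  have ea : (addr (f + 132)).toNat = f + 132 := toNat_addr _ (by omega)
  constructor
  · simp only [vacc, voff]
    rw [mem.u64_writeLE _ 4 _ _ (by omega) (by omega) (by omega), hB]
    exact h1
  · simp only [vacc, voff]
    rw [mem.i32_writeLE _ 4 _ _ (by omega) (by omega) (by omega), hL]
    exact h2
  · simp only [vacc, voff]
    rw [mem.i32_writeLE _ 4 _ _ (by omega) (by omega) (by omega), hS]
    exact h3
  · simp only [vacc, voff]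
    rw [mem.i32_writeLE_same]
    have hm : A'.T % 2 ^ 32 = A'.T := Nat.mod_eq_of_lt (by omega)
    rw [hm]
    have := sint32_cases A'.T
    omega

end ArenaFields

namespace ArenaOK
variable {A : Arena} {others : List Obj} {mem mem' : Mem} {f : Nat}

/-! #### Arithmetic consequences -/

/-- **The ranges of the four numbers**: everything is below `B00000H`, far from any 32-bit wrap. After FIX A's guard
(`0 ≤ sz ≤ T - S`) the machine's `sz + 7`, `S + r8 sz + 32`, `T - r8 sz - 31`, `T - (r8 sz + 32)` are exact. -/
theorem bounds (h : ArenaOK A others mem f) : A.S ≤ A.T ∧ A.T ≤ A.L ∧ A.L ≤ 0xB00000 ∧ A.B + A.L ≤ 0xC00000 := by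
  have h1 := h.AR1
  have h1x := h.AR1x
  have h2 := h.AR2
  omega

/-- `temps = []` ⇒ `T = L` (SD.4: the head of every iteration of the codebook loop). -/
theorem T_eq_L_of_nil (h : ArenaOK A others mem f) (ht : A.temps = []) : A.T = A.L := by
  have h4 := h.AR4
  rw [ht] at h4
  simp only [TempChain] at h4
  exact h4

/-- `setups = []` ⇒ `S = 0` (P3: right after `vorbis_init`). -/
theorem S_eq_zero_of_nil (h : ArenaOK A others mem f) (hs : A.setups = []) : A.S = 0 := by
  have h3 := h.AR3
  rw [hs] at h3
  simp only [SetupChain] at h3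
  exact h3

/-- The unsigned readings of the fields, as the stepper's loads produce them (`mov r32, [f + 128]` ↦ `addr (mem.u32 (f + 128))`):
`setup_offset` is the number `S`. -/
theorem u32_setup (h : ArenaOK A others mem f) : mem.u32 (f + 128) = A.S := by
  have hb := h.bounds
  have h5 := h.AR5.setup
  simp only [vacc, voff] at h5
  have := mem.i32_cases (f + 128)
  omega

/-- `mov r32, [f + 132]` leaves the number `T`. -/
theorem u32_temp (h : ArenaOK A others mem f) : mem.u32 (f + 132) = A.T := by
  have hb := h.bounds
  have h5 := h.AR5.temp
  simp only [vacc, voff] at h5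
  have := mem.i32_cases (f + 132)
  omega

/-- `mov r32, [f + 120]` leaves the number `L`. -/
theorem u32_length (h : ArenaOK A others mem f) : mem.u32 (f + 120) = A.L := by
  have hb := h.bounds
  have h5 := h.AR5.length
  simp only [vacc, voff] at h5
  have := mem.i32_cases (f + 120)
  omega

/-- `mov r64, [f + 112]` leaves the number `B`. -/
theorem u64_buffer (h : ArenaOK A others mem f) : mem.u64 (f + 112) = A.B := by
  have h5 := h.AR5.buffer
  simp only [vacc, voff] at h5
  exact h5

/-- `alloc_buffer ≠ 0`: the `malloc` / `free` / `alloca` arms are dead (I5's M9). -/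
theorem buffer_ne_zero (h : ArenaOK A others mem f) : mem.u64 (f + 112) ≠ 0 := by
  rw [h.u64_buffer]
  have := h.AR1
  omega

/-! #### Where the blocks lie -/

/-- **A setup block**: 8-aligned, behind its red zone, its padded size inside `[B, B + S)`. -/
theorem block_range (h : ArenaOK A others mem f) {p n : Nat} (hb : A.Block p n) :
    p % 8 = 0 ∧ A.B + 32 ≤ p ∧ p + r8 n ≤ A.B + A.S := by
  obtain ⟨o, ho, hp⟩ := hb
  have h1 := h.AR1
  have hm := h.AR3.mem ho
  have ha := (h.AR3.aligned (by omega)).2 (o, n) ho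
  simp only at hm ha
  omega

/-- **A temp block**: 8-aligned, inside `[B + T, B + L)` with its red zone. -/
theorem tblock_range (h : ArenaOK A others mem f) {p n : Nat} (hb : A.TBlock p n) :
    p % 8 = 0 ∧ A.B + A.T ≤ p ∧ p + r8 n + 32 ≤ A.B + A.L := by
  obtain ⟨o, ho, hp⟩ := hb
  have h1 := h.AR1
  have hm := h.AR4.mem ho
  have ha := (h.AR4.aligned (by omega)).2 (o, n) ho
  simp only at hm ha
  omega

/-- `Block(p, n)` ⇒ `p ≠ 0`: a successful allocation never returns NULL. -/
theorem block_ne_zero (h : ArenaOK A others mem f) {p n : Nat} (hb : A.Block p n) : p ≠ 0 := by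
  have := h.block_range hb
  omega

/-- A block lies in the data space, off the stack and below the shadow: no store to the stack or to the shadow touches it. -/
theorem block_off (h : ArenaOK A others mem f) {p n : Nat} (hb : A.Block p n) :
    0x100000 ≤ p ∧ p + n ≤ 0xC00000 ∧ (p + n ≤ 0x700000 ∨ 0x800000 ≤ p) := by
  have hr := h.block_range hb
  have h1 := h.AR1
  have h1x := h.AR1x
  have h2 := h.AR2
  have := le_r8 n
  omega

/-- The same for a temp block. -/
theorem tblock_off (h : ArenaOK A others mem f) {p n : Nat} (hb : A.TBlock p n) :
    0x100000 ≤ p ∧ p + n ≤ 0xC00000 ∧ (p + n ≤ 0x700000 ∨ 0x800000 ≤ p) := by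
  have hr := h.tblock_range hb
  have h1 := h.AR1
  have h1x := h.AR1x
  have h2 := h.AR2
  have := le_r8 n
  omega

/-- **Two setup blocks are the same block or disjoint**, with at least the red zone between them. -/
theorem block_apart (h : ArenaOK A others mem f) {p n q m : Nat} (hp : A.Block p n) (hq : A.Block q m) :
    (p = q ∧ n = m) ∨ p + r8 n + 32 ≤ q ∨ q + r8 m + 32 ≤ p := by
  obtain ⟨o1, ho1, e1⟩ := hp
  obtain ⟨o2, ho2, e2⟩ := hq
  rcases h.AR3.apart ho1 ho2 with e | hlt | hgt
  · left
    have ea : o1 = o2 := congrArg Prod.fst e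
    have eb : n = m := congrArg Prod.snd e
    exact ⟨by rw [e1, e2, ea], eb⟩
  · simp only at hlt
    omega
  · simp only at hgt
    omega

/-- The same in the vocabulary of Vorbis/Fields.lean: a store inside one block keeps the other (`Block.Same.of_writeLE`). -/
theorem block_disjoint (h : ArenaOK A others mem f) {p n q m : Nat} (hp : A.Block p n) (hq : A.Block q m) (hne : p ≠ q) :
    (Vorbis.Block.mk p n).disjoint (Vorbis.Block.mk q m) := by
  have := le_r8 n
  have := le_r8 m
  simp only [vblock]
  rcases h.block_apart hp hq with e | hlt | hgt
  · exact absurd e.1 hne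
  · omega
  · omega

/-- A setup block and a temp block are disjoint: the free gap is between them. -/
theorem block_tblock_disjoint (h : ArenaOK A others mem f) {p n q m : Nat} (hp : A.Block p n) (hq : A.TBlock q m) :
    (Vorbis.Block.mk p n).disjoint (Vorbis.Block.mk q m) := by
  have h1 := h.block_range hp
  have h2 := h.tblock_range hq
  have h3 := h.AR2
  have := le_r8 n
  simp only [vblock]
  omega

/-- Two temp blocks are the same or apart. -/
theorem tblock_apart (h : ArenaOK A others mem f) {p n q m : Nat} (hp : A.TBlock p n) (hq : A.TBlock q m) :
    (p = q ∧ n = m) ∨ p + r8 n + 32 ≤ q ∨ q + r8 m + 32 ≤ p := by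
  obtain ⟨o1, ho1, e1⟩ := hp
  obtain ⟨o2, ho2, e2⟩ := hq
  rcases h.AR4.apart ho1 ho2 with e | hlt | hgt
  · left
    have ea : o1 = o2 := congrArg Prod.fst e
    have eb : n = m := congrArg Prod.snd e
    exact ⟨by rw [e1, e2, ea], eb⟩
  · simp only at hlt
    omega
  · simp only at hgt
    omega

/-! #### USE: a block is live, a check inside it passes -/

/-- **`block_live`: a setup block is a live block** of any live list that contains `others` (`stackObjs frames ++ others` of
`ShadowInv`), in the vocabulary of Vorbis/Fields.lean: feed it to `acc_of_obj`. -/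
theorem block_live (h : ArenaOK A others mem f) {objs : List Obj} (hsub : ∀ o, o ∈ others → o ∈ objs) {p n : Nat}
    (hb : A.Block p n) : (Vorbis.Block.mk p n).live (Live objs) := by
  intro i hi
  refine ⟨⟨p, n, .setup⟩, hsub _ (h.AR6 _ hb.obj_mem), ?_⟩
  unfold Obj.Bytes
  simp only at hi ⊢
  omega

/-- **A temp block is a live block.** -/
theorem tblock_live (h : ArenaOK A others mem f) {objs : List Obj} (hsub : ∀ o, o ∈ others → o ∈ objs) {p n : Nat}
    (hb : A.TBlock p n) : (Vorbis.Block.mk p n).live (Live objs) := by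
  intro i hi
  refine ⟨⟨p, n, .temp⟩, hsub _ (h.AR6 _ hb.obj_mem), ?_⟩
  unfold Obj.Bytes
  simp only at hi ⊢
  omega

/-- **A check site inside a setup block** (1-, 2-, 4-, 8-byte checks): `k` bytes at `a` inside `[p, p + n)`. -/
theorem block_acc (h : ArenaOK A others mem f) {objs : List Obj} (hsub : ∀ o, o ∈ others → o ∈ objs)
    (hsh : ShadowOK objs mem) {p n : Nat} (hb : A.Block p n) {a k : Nat} (h1 : p ≤ a) (h2 : a + k ≤ p + n) (hk : 1 ≤ k) :
    AccessibleSmall mem a k :=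
  Vorbis.acc_of_obj hsh.covers (h.block_live hsub hb) h1 h2 hk

/-- **A check site inside a temp block.** -/
theorem tblock_acc (h : ArenaOK A others mem f) {objs : List Obj} (hsub : ∀ o, o ∈ others → o ∈ objs)
    (hsh : ShadowOK objs mem) {p n : Nat} (hb : A.TBlock p n) {a k : Nat} (h1 : p ≤ a) (h2 : a + k ≤ p + n) (hk : 1 ≤ k) :
    AccessibleSmall mem a k :=
  Vorbis.acc_of_obj hsh.covers (h.tblock_live hsub hb) h1 h2 hk

/-- **`setups_permanent`**: a setup block of an EARLIER arena `A₀` (AR7: `A₀.Extends A`) is a setup block of the present one, with the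
same base and size, and it is live now. So every SHAPE clause of the decoder layer, once established, survives every later
allocator call. (Its CONTENTS survive too: an allocator writes `*f`, its own stack frame and shadow bytes only, and a block lies
off all three: `block_off`, `block_disjoint`; Vorbis/ArenaTest.lean (b).) -/
theorem setups_permanent (h : ArenaOK A others mem f) {A₀ : Arena} (hext : A₀.Extends A) {objs : List Obj}
    (hsub : ∀ o, o ∈ others → o ∈ objs) {p n : Nat} (hb : A₀.Block p n) :
    A.Block p n ∧ (Vorbis.Block.mk p n).live (Live objs) :=
  ⟨hb.mono hext, h.block_live hsub (hb.mono hext)⟩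

/-! #### FRAME, and moving `f` -/

/-- **FRAME of `ArenaOK`**: only AR5 reads memory; it reads `[f + 112, f + 136)`. -/
theorem frame (h : ArenaOK A others mem f) (hf : f + Off.sizeof.stb_vorbis ≤ 2 ^ 64)
    (hs : Mem.EqOn (f + Off.stb_vorbis.alloc) (f + Off.stb_vorbis.temp_offset + 4) mem mem') : ArenaOK A others mem' f :=
  ⟨h.AR1, h.AR1x, h.AR2, h.AR3, h.AR4, h.AR5.frame hf hs, h.AR6, h.AR6x⟩

/-- FRAME of `ArenaOK` from the whole decoder object. -/
theorem frame_obj (h : ArenaOK A others mem f) (hf : f + Off.sizeof.stb_vorbis ≤ 2 ^ 64)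
    (hs : (Vorbis.Block.mk f Off.sizeof.stb_vorbis).Same mem mem') : ArenaOK A others mem' f :=
  ⟨h.AR1, h.AR1x, h.AR2, h.AR3, h.AR4, h.AR5.frame_obj hf hs, h.AR6, h.AR6x⟩

/-- **`*f = p`**: the arena state belongs to whichever object holds the four fields (P5: the arena copy `f'` after the struct copy;
any later memory). -/
theorem move (h : ArenaOK A others mem f) {f' : Nat} (h5 : ArenaFields A mem' f') : ArenaOK A others mem' f' :=
  ⟨h.AR1, h.AR1x, h.AR2, h.AR3, h.AR4, h5, h.AR6, h.AR6x⟩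

/-- **The list of live objects changes outside the arena** (an event of the shadow layer that is not an allocator call): the arena's
clauses only see the objects inside `[B, B + L)`. Every block is still in the new list, and every object of the new list is an old one
or lies outside the arena. -/
theorem others_change (h : ArenaOK A others mem f) {others' : List Obj} (h6 : ∀ o, o ∈ A.objs → o ∈ others')
    (h6x : ∀ o, o ∈ others' → o ∈ others ∨ (o.kind ≠ .setup ∧ o.kind ≠ .temp ∧ (o.base + o.size ≤ A.B ∨ A.B + A.L ≤ o.base))) :
    ArenaOK A others' mem f := by
  refine ⟨h.AR1, h.AR1x, h.AR2, h.AR3, h.AR4, h.AR5, h6, ?_⟩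
  intro o ho
  rcases h6x o ho with hold | hout
  · exact h.AR6x o hold
  · exact Or.inr hout

/-- What survives an error return of `start_decoder`. -/
theorem err (h : ArenaOK A others mem f) : ArenaErr A others := by
  refine ⟨h.AR1, ?_⟩
  intro o ho
  exact h.AR6 o (List.mem_append_left _ ho)

/-! #### ESTABLISH: `vorbis_init` -/

/-- **P3, after `vorbis_init(&p, alloc)`**: `S = 0`, `T = L`, no block. The parameters' facts (AR1, AR1x) come from the start file;
no live object meets the arena (it is wholly poisoned). -/
theorem init (B L : Nat) (h1 : B % 8 = 0 ∧ 0 < B ∧ L % 8 = 0 ∧ B + L ≤ 0xC00000)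
    (h1x : 0x100000 ≤ B ∧ (B + L ≤ 0x700000 ∨ 0x800000 ≤ B))
    (h5 : ArenaFields ⟨B, L, 0, L, [], []⟩ mem f)
    (hout : ∀ o, o ∈ others → o.kind ≠ .setup ∧ o.kind ≠ .temp ∧ (o.base + o.size ≤ B ∨ B + L ≤ o.base)) :
    ArenaOK ⟨B, L, 0, L, [], []⟩ others mem f := by
  refine ⟨h1, h1x, ?_, ?_, ?_, h5, ?_, ?_⟩
  · exact ⟨Nat.zero_le _, Nat.le_refl _, rfl, h1.2.2.1⟩
  · simp only [SetupChain]
  · simp only [TempChain]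
  · intro o ho
    cases ho
  · intro o ho
    exact Or.inr (hout o ho)

end ArenaOK

/-- A setup block is live also after an error return of `start_decoder` (what `vorbis_deinit`'s loads need). -/
theorem ArenaErr.block_live {A : Arena} {others : List Obj} (h : ArenaErr A others) {objs : List Obj}
    (hsub : ∀ o, o ∈ others → o ∈ objs) {p n : Nat} (hb : A.Block p n) : (Vorbis.Block.mk p n).live (Live objs) := by
  intro i hi
  obtain ⟨o, ho, hp⟩ := hb
  have hmem : (⟨p, n, .setup⟩ : Obj) ∈ A.setupObjs := by
    unfold Arena.setupObjs
    apply List.mem_map.mpr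
    refine ⟨(o, n), ho, ?_⟩
    unfold Arena.setupObj
    rw [hp]
  refine ⟨⟨p, n, .setup⟩, hsub _ (h.AR6s _ hmem), ?_⟩
  unfold Obj.Bytes
  simp only at hi ⊢
  omega


/-! ### 5. TRANSITIONS: what each allocator function does to the ghost state

Each lemma takes `ArenaOK` of the state before, the function's success condition, and AR5 of the NEW arena in the final memory
(from the function's one store: `ArenaFields.store_setup` / `.store_temp`, carried to the final memory by `.frame`), and gives
`ArenaOK` of the new arena with the new list of live objects. The shadow half (what `arena_unpoison` / `arena_poison` did) is Q0's
`ShadowInv.unpoison` / `.poison`; the lemmas `newSetup_*`, `newTemp_*`, `drop_*` are their side conditions. -/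

/-- Two objects with a granule boundary `m` between them share no granule. -/
theorem granDisj_of_le {o o' : Obj} (m : Nat) (hm : m % 8 = 0) (h1 : o.base + o.size ≤ m) (h2 : m ≤ o'.base) : GranDisj o o' := by
  unfold GranDisj Obj.gLo Obj.gHi
  omega

namespace Arena

/-- The buffer is not changed by any transition: the objects of the blocks are computed with the same `B`. -/
theorem setupObj_pushSetup (A : Arena) (n : Nat) (b : Nat × Nat) : (A.pushSetup n).setupObj b = A.setupObj b := id rfl

/-- The arena's objects after `setup_malloc`: the new one and the old ones. -/
theorem mem_objs_pushSetup (A : Arena) (n : Nat) (o : Obj) : o ∈ (A.pushSetup n).objs ↔ o = A.newSetupObj n ∨ o ∈ A.objs := by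
  have e : (A.pushSetup n).objs = (A.setups ++ [(A.S + 32, n)]).map A.setupObj ++ A.tempObjs := rfl
  rw [e]
  unfold objs setupObjs newSetupObj
  simp only [List.map_append, List.map_cons, List.map_nil, List.mem_append, List.mem_singleton]
  constructor
  · rintro ((h | h) | h)
    · exact Or.inr (Or.inl h)
    · exact Or.inl h
    · exact Or.inr (Or.inr h)
  · rintro (h | h | h)
    · exact Or.inl (Or.inr h)
    · exact Or.inl (Or.inl h)
    · exact Or.inr h

/-- The arena's objects after `setup_temp_malloc`: the new one and the old ones. -/
theorem mem_objs_pushTemp (A : Arena) (n : Nat) (o : Obj) : o ∈ (A.pushTemp n).objs ↔ o = A.newTempObj n ∨ o ∈ A.objs := by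
  have e : (A.pushTemp n).objs = A.setupObjs ++ ((A.T - (r8 n + 32), n) :: A.temps).map A.tempObj := rfl
  rw [e]
  unfold objs tempObjs newTempObj
  simp only [List.map_cons, List.mem_append, List.mem_cons]
  constructor
  · rintro (h | h | h)
    · exact Or.inr (Or.inl h)
    · exact Or.inl h
    · exact Or.inr (Or.inr h)
  · rintro (h | h | h)
    · exact Or.inr (Or.inl h)
    · exact Or.inl h
    · exact Or.inr (Or.inr h)

/-- The arena's objects after a release: the setup blocks and the temp blocks that stay. -/
theorem mem_objs_withTemp (A : Arena) (T' : Nat) (keep : List (Nat × Nat)) (o : Obj) :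
    o ∈ (A.withTemp T' keep).objs ↔ o ∈ A.setupObjs ∨ o ∈ keep.map A.tempObj := by
  have e : (A.withTemp T' keep).objs = A.setupObjs ++ keep.map A.tempObj := rfl
  rw [e, List.mem_append]

end Arena

/-- The end of a temp chain is determined by its start and its blocks. -/
theorem TempChain.end_unique {t p p' : Nat} {l : List (Nat × Nat)} (h : TempChain t l p) (h' : TempChain t l p') : p = p' := by
  induction l generalizing t with
  | nil =>
    simp only [TempChain] at h h'
    omega
  | cons b rest ih =>
    simp only [TempChain] at h h'
    exact ih h.2 h'.2

namespace ArenaOK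
variable {A : Arena} {others : List Obj} {mem mem' : Mem} {f : Nat}

/-- Where an object of the arena lies, byte-wise: a setup block below `B + S`, a temp block from `B + T` on; 8-aligned. -/
theorem obj_range (h : ArenaOK A others mem f) {o : Obj} (ho : o ∈ A.objs) :
    o.base % 8 = 0 ∧
      ((o.kind = .setup ∧ A.B + 32 ≤ o.base ∧ o.base + r8 o.size ≤ A.B + A.S) ∨
       (o.kind = .temp ∧ A.B + A.T ≤ o.base ∧ o.base + r8 o.size + 32 ≤ A.B + A.L)) := by
  rcases Arena.mem_objs ho with ⟨b, hb, e⟩ | ⟨b, hb, e⟩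
  · have hr := h.block_range ⟨b.1, hb, rfl⟩
    rw [e]
    unfold Arena.setupObj
    simp only
    exact ⟨hr.1, Or.inl ⟨trivial, hr.2.1, hr.2.2⟩⟩
  · have hr := h.tblock_range ⟨b.1, hb, rfl⟩
    rw [e]
    unfold Arena.tempObj
    simp only
    exact ⟨hr.1, Or.inr ⟨trivial, hr.2.1, hr.2.2⟩⟩

/-! #### `setup_malloc` -/

/-- **The new setup block, as `ShadowInv.unpoison` wants it**: 8-aligned, in the data space, off the stack. -/
theorem newSetup_facts (h : ArenaOK A others mem f) (n : Nat) (hfit : A.Fits n) :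
    (A.newSetupObj n).base % 8 = 0 ∧ 0x100000 ≤ (A.newSetupObj n).base ∧
      (A.newSetupObj n).base + (A.newSetupObj n).size ≤ 0xC00000 ∧
      ((A.newSetupObj n).base + (A.newSetupObj n).size ≤ 0x700000 ∨ 0x800000 ≤ (A.newSetupObj n).base) := by
  have h1 := h.AR1
  have h1x := h.AR1x
  have h2 := h.AR2
  have hr := le_r8 n
  unfold Arena.Fits at hfit
  unfold Arena.newSetupObj Arena.setupObj
  simp only
  omega

/-- **The new setup block shares no granule with a live object.** -/
theorem newSetup_disj (h : ArenaOK A others mem f) (n : Nat) (hfit : A.Fits n) :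
    ∀ o', o' ∈ others → GranDisj (A.newSetupObj n) o' := by
  intro o' ho'
  have h1 := h.AR1
  have h2 := h.AR2
  have hr := le_r8 n
  have hr8 := r8_mod n
  unfold Arena.Fits at hfit
  have eb : (A.newSetupObj n).base = A.B + (A.S + 32) := rfl
  have es : (A.newSetupObj n).size = n := rfl
  rcases h.AR6x o' ho' with hin | ⟨_, _, hout⟩
  · have hor := h.obj_range hin
    have hr' := le_r8 o'.size
    rcases hor.2 with ⟨_, k1, k2⟩ | ⟨_, k1, k2⟩
    · apply GranDisj.symm
      exact granDisj_of_le (A.B + A.S) (by omega) (by omega) (by omega)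
    · exact granDisj_of_le (A.B + A.T) (by omega) (by omega) (by omega)
  · rcases hout with hlo | hhi
    · apply GranDisj.symm
      exact granDisj_of_le A.B (by omega) hlo (by omega)
    · exact granDisj_of_le (A.B + A.L) (by omega) (by omega) hhi

/-- The new setup block was not a live object. -/
theorem newSetup_not_mem (h : ArenaOK A others mem f) (n : Nat) : A.newSetupObj n ∉ others := by
  intro hin
  have eb : (A.newSetupObj n).base = A.B + (A.S + 32) := rfl
  have ek : (A.newSetupObj n).kind = .setup := rfl
  rcases h.AR6x _ hin with hobj | ⟨hk, _, _⟩
  · have hor := h.obj_range hobj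
    rcases hor.2 with ⟨_, k1, k2⟩ | ⟨hk, _, _⟩
    · omega
    · rw [ek] at hk
      cases hk
  · exact hk ek

/-- **`setup_malloc(f, n)` succeeded** (`0 ≤ sz = n`, `A.Fits n`): `S' = S + 32 + r8 n`, the block `(S + 32, n)` appended, its object
live. Returned pointer: `B + S + 32` (`Arena.block_pushSetup`; `≠ 0`: `block_ne_zero`); AR7: `Arena.extends_pushSetup`. -/
theorem setup_malloc (h : ArenaOK A others mem f) (n : Nat) (hfit : A.Fits n) (h5 : ArenaFields (A.pushSetup n) mem' f) :
    ArenaOK (A.pushSetup n) (A.newSetupObj n :: others) mem' f := by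
  have h2 := h.AR2
  have hr8 := r8_mod n
  unfold Arena.Fits at hfit
  refine ⟨h.AR1, h.AR1x, ?_, ?_, h.AR4, h5, ?_, ?_⟩
  · show A.S + 32 + r8 n ≤ A.T ∧ A.T ≤ A.L ∧ (A.S + 32 + r8 n) % 8 = 0 ∧ A.T % 8 = 0
    omega
  · exact h.AR3.snoc n
  · intro o ho
    rcases (A.mem_objs_pushSetup n o).mp ho with e | hold
    · rw [e]
      exact List.mem_cons_self
    · exact List.mem_cons_of_mem _ (h.AR6 o hold)
  · intro o ho
    rcases List.mem_cons.mp ho with e | hold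
    · left
      exact (A.mem_objs_pushSetup n o).mpr (Or.inl e)
    · rcases h.AR6x o hold with hin | hout
      · left
        exact (A.mem_objs_pushSetup n o).mpr (Or.inr hin)
      · exact Or.inr hout

/-! #### `setup_temp_malloc` -/

/-- **The new temp block, as `ShadowInv.unpoison` wants it.** -/
theorem newTemp_facts (h : ArenaOK A others mem f) (n : Nat) (hfit : A.Fits n) :
    (A.newTempObj n).base % 8 = 0 ∧ 0x100000 ≤ (A.newTempObj n).base ∧
      (A.newTempObj n).base + (A.newTempObj n).size ≤ 0xC00000 ∧
      ((A.newTempObj n).base + (A.newTempObj n).size ≤ 0x700000 ∨ 0x800000 ≤ (A.newTempObj n).base) := by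
  have h1 := h.AR1
  have h1x := h.AR1x
  have h2 := h.AR2
  have hr := le_r8 n
  have hr8 := r8_mod n
  unfold Arena.Fits at hfit
  unfold Arena.newTempObj Arena.tempObj
  simp only
  omega

/-- **The new temp block shares no granule with a live object** ("disjoint from everything else"). -/
theorem newTemp_disj (h : ArenaOK A others mem f) (n : Nat) (hfit : A.Fits n) :
    ∀ o', o' ∈ others → GranDisj (A.newTempObj n) o' := by
  intro o' ho'
  have h1 := h.AR1
  have h2 := h.AR2
  have hr := le_r8 n
  have hr8 := r8_mod n
  unfold Arena.Fits at hfit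
  have eb : (A.newTempObj n).base = A.B + (A.T - (r8 n + 32)) := rfl
  have es : (A.newTempObj n).size = n := rfl
  rcases h.AR6x o' ho' with hin | ⟨_, _, hout⟩
  · have hor := h.obj_range hin
    have hr' := le_r8 o'.size
    rcases hor.2 with ⟨_, k1, k2⟩ | ⟨_, k1, k2⟩
    · apply GranDisj.symm
      exact granDisj_of_le (A.B + A.S) (by omega) (by omega) (by omega)
    · exact granDisj_of_le (A.B + A.T) (by omega) (by omega) (by omega)
  · rcases hout with hlo | hhi
    · apply GranDisj.symm
      exact granDisj_of_le A.B (by omega) hlo (by omega)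
    · exact granDisj_of_le (A.B + A.L) (by omega) (by omega) hhi

/-- The new temp block was not a live object (so releasing it gives the old list back: `dropObjs_cons_self`). -/
theorem newTemp_not_mem (h : ArenaOK A others mem f) (n : Nat) (hfit : A.Fits n) : A.newTempObj n ∉ others := by
  intro hin
  have h2 := h.AR2
  unfold Arena.Fits at hfit
  have eb : (A.newTempObj n).base = A.B + (A.T - (r8 n + 32)) := rfl
  have ek : (A.newTempObj n).kind = .temp := rfl
  rcases h.AR6x _ hin with hobj | ⟨_, hk, _⟩
  · have hor := h.obj_range hobj
    rcases hor.2 with ⟨hk, _, _⟩ | ⟨_, k1, k2⟩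
    · rw [ek] at hk
      cases hk
    · omega
  · exact hk ek

/-- **`setup_temp_malloc(f, n)` succeeded** (`0 ≤ sz = n`, `A.Fits n`): `T' = T - r8 n - 32`, the block `(T', n)` on top of the temp
stack, its object live. Returned pointer: `B + T'` (`Arena.tblock_pushTemp`). -/
theorem temp_malloc (h : ArenaOK A others mem f) (n : Nat) (hfit : A.Fits n) (h5 : ArenaFields (A.pushTemp n) mem' f) :
    ArenaOK (A.pushTemp n) (A.newTempObj n :: others) mem' f := by
  have h2 := h.AR2
  have hr8 := r8_mod n
  unfold Arena.Fits at hfit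
  refine ⟨h.AR1, h.AR1x, ?_, h.AR3, ?_, h5, ?_, ?_⟩
  · show A.S ≤ A.T - (r8 n + 32) ∧ A.T - (r8 n + 32) ≤ A.L ∧ A.S % 8 = 0 ∧ (A.T - (r8 n + 32)) % 8 = 0
    omega
  · show TempChain (A.T - (r8 n + 32)) ((A.T - (r8 n + 32), n) :: A.temps) A.L
    simp only [TempChain]
    have e : A.T - (r8 n + 32) + r8 n + 32 = A.T := by omega
    rw [e]
    exact ⟨trivial, h.AR4⟩
  · intro o ho
    rcases (A.mem_objs_pushTemp n o).mp ho with e | hold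
    · rw [e]
      exact List.mem_cons_self
    · exact List.mem_cons_of_mem _ (h.AR6 o hold)
  · intro o ho
    rcases List.mem_cons.mp ho with e | hold
    · left
      exact (A.mem_objs_pushTemp n o).mpr (Or.inl e)
    · rcases h.AR6x o hold with hin | hout
      · left
        exact (A.mem_objs_pushTemp n o).mpr (Or.inr hin)
      · exact Or.inr hout

/-! #### `arena_temp_restore` and `setup_temp_free` -/

/-- **`arena_temp_restore(f, p)`**, `p` a CUT POINT of the temp stack: the blocks `dead` below `p` end exactly at `p`
(`temps = dead ++ keep`, `TempChain T dead p`; `p = L`: `dead = temps`; `p = T`: `dead = []`). Then `T' = p`, `temps' = keep`, the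
dead blocks' objects leave the live list. -/
theorem temp_restore (h : ArenaOK A others mem f) {dead keep : List (Nat × Nat)} {p : Nat} (ht : A.temps = dead ++ keep)
    (hd : TempChain A.T dead p) (h5 : ArenaFields (A.withTemp p keep) mem' f) :
    ArenaOK (A.withTemp p keep) (dropObjs (dead.map A.tempObj) others) mem' f := by
  have h1 := h.AR1
  have h2 := h.AR2
  have h4 := h.AR4
  rw [ht] at h4
  obtain ⟨p', hd', hk⟩ := TempChain.append_iff.mp h4
  have ep : p = p' := hd.end_unique hd'
  subst ep
  have hle1 := hd.le
  have hle2 := hk.le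
  have hal := hk.aligned h1.2.2.1
  refine ⟨h.AR1, h.AR1x, ?_, h.AR3, hk, h5, ?_, ?_⟩
  · show A.S ≤ p ∧ p ≤ A.L ∧ A.S % 8 = 0 ∧ p % 8 = 0
    omega
  · intro o ho
    rw [mem_dropObjs]
    rcases (A.mem_objs_withTemp p keep o).mp ho with hs | hkp
    · refine ⟨h.AR6 o (List.mem_append_left _ hs), ?_⟩
      intro hdead
      obtain ⟨b, _, e⟩ := List.mem_map.mp hdead
      unfold Arena.setupObjs at hs
      obtain ⟨c, _, e'⟩ := List.mem_map.mp hs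
      have ek : (A.tempObj b).kind = (A.setupObj c).kind := by rw [e, e']
      cases ek
    · obtain ⟨b, hb, e⟩ := List.mem_map.mp hkp
      refine ⟨h.AR6 o ?_, ?_⟩
      · apply List.mem_append_right
        unfold Arena.tempObjs
        rw [ht]
        exact List.mem_map.mpr ⟨b, List.mem_append_right _ hb, e⟩
      · intro hdead
        obtain ⟨c, hc, e'⟩ := List.mem_map.mp hdead
        have eb : (A.tempObj c).base = (A.tempObj b).base := by rw [e, e']
        have eb' : A.B + c.1 = A.B + b.1 := eb
        have k1 := hd.mem hc
        have k2 := hk.mem hb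
        omega
  · intro o ho
    rw [mem_dropObjs] at ho
    rcases h.AR6x o ho.1 with hin | hout
    · left
      apply (A.mem_objs_withTemp p keep o).mpr
      rcases List.mem_append.mp hin with hs | htp
      · exact Or.inl hs
      · right
        unfold Arena.tempObjs at htp
        rw [ht, List.map_append] at htp
        rcases List.mem_append.mp htp with hdd | hkk
        · exact absurd hdd ho.2
        · exact hkk
    · exact Or.inr hout

/-- **Which objects survive a release, as `ShadowInv.poison` wants it**: none of them has a granule in the poisoned range
`[B + T, B + T + n)`, for any `n` that stays at or below the cut point (`setup_temp_free`: `n = r8 sz`, the red zone above it is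
not touched; `arena_temp_restore`: `n = p - T`). -/
theorem drop_out (h : ArenaOK A others mem f) {dead keep : List (Nat × Nat)} {p : Nat} (ht : A.temps = dead ++ keep)
    (hd : TempChain A.T dead p) (n : Nat) (hn : A.T + n ≤ p) :
    ∀ o, o ∈ dropObjs (dead.map A.tempObj) others → o.gHi ≤ (A.B + A.T) / 8 ∨ (A.B + A.T + n + 7) / 8 ≤ o.gLo := by
  intro o ho
  have h1 := h.AR1
  have h2 := h.AR2
  have h4 := h.AR4
  rw [ht] at h4
  obtain ⟨p', hd', hk⟩ := TempChain.append_iff.mp h4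
  have ep : p = p' := hd.end_unique hd'
  subst ep
  have hle2 := hk.le
  have hal := hk.aligned h1.2.2.1
  rw [mem_dropObjs] at ho
  unfold Obj.gHi Obj.gLo
  rcases h.AR6x o ho.1 with hin | ⟨_, _, hout⟩
  · rcases List.mem_append.mp hin with hs | htp
    · have hor := h.obj_range (List.mem_append_left _ hs)
      have hr' := le_r8 o.size
      unfold Arena.setupObjs at hs
      obtain ⟨c, _, e'⟩ := List.mem_map.mp hs
      have ek : o.kind = .setup := by rw [← e']; rfl
      rcases hor.2 with ⟨_, k1, k2⟩ | ⟨hk', _, _⟩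
      · omega
      · rw [ek] at hk'
        cases hk'
    · unfold Arena.tempObjs at htp
      rw [ht, List.map_append] at htp
      rcases List.mem_append.mp htp with hdd | hkk
      · exact absurd hdd ho.2
      · obtain ⟨b, hb, e⟩ := List.mem_map.mp hkk
        have k2 := hk.mem hb
        have eb : o.base = A.B + b.1 := by rw [← e]; rfl
        omega
  · omega

/-- **The poisoned range of a release, as `ShadowInv.poison` wants it**: 8-aligned, in the data space, off the stack. -/
theorem drop_facts (h : ArenaOK A others mem f) {p : Nat} (hp : p ≤ A.L) (n : Nat) (hn : A.T + (n + 7) / 8 * 8 ≤ p) :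
    (A.B + A.T) % 8 = 0 ∧ 0x100000 ≤ A.B + A.T ∧ A.B + A.T + (n + 7) / 8 * 8 ≤ 0xC00000 ∧
      (A.B + A.T + (n + 7) / 8 * 8 ≤ 0x700000 ∨ 0x800000 ≤ A.B + A.T) := by
  have h1 := h.AR1
  have h1x := h.AR1x
  have h2 := h.AR2
  omega

/-- **`setup_temp_free(f, p, sz)`, the LIFO contract**: `p = B + t` is the TOP temp block `(t, m)` (so `t = T`) and `sz` rounds like
the size it was allocated with (`r8 sz = r8 m`: the pairs P1–P4 of I6 §4.4 pass the same expression to both calls). Then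
`T' = T + r8 sz + 32`, the block leaves the stack and the live list. -/
theorem temp_free (h : ArenaOK A others mem f) {t m : Nat} {rest : List (Nat × Nat)} (ht : A.temps = (t, m) :: rest) (sz : Nat)
    (hsz : r8 sz = r8 m) (h5 : ArenaFields (A.withTemp (A.T + r8 sz + 32) rest) mem' f) :
    ArenaOK (A.withTemp (A.T + r8 sz + 32) rest) (dropObjs [A.tempObj (t, m)] others) mem' f := by
  have h4 := h.AR4
  rw [ht] at h4
  simp only [TempChain] at h4
  have hd : TempChain A.T [(t, m)] (A.T + r8 sz + 32) := by
    simp only [TempChain]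
    refine ⟨h4.1, ?_⟩
    rw [hsz, h4.1]
  exact h.temp_restore (dead := [(t, m)]) (keep := rest) ht hd h5

/-- The top temp block starts at `temp_offset`: the pointer `setup_temp_free` is called with is `B + T`. -/
theorem top_eq_T (h : ArenaOK A others mem f) {t m : Nat} {rest : List (Nat × Nat)} (ht : A.temps = (t, m) :: rest) :
    t = A.T ∧ A.T + r8 m + 32 ≤ A.L := by
  have h4 := h.AR4
  rw [ht] at h4
  simp only [TempChain] at h4
  have := h4.2.le
  omega

/-- The cut-point hypothesis of `temp_free`, for `drop_out`. -/
theorem top_chain (h : ArenaOK A others mem f) {t m : Nat} {rest : List (Nat × Nat)} (ht : A.temps = (t, m) :: rest) (sz : Nat)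
    (hsz : r8 sz = r8 m) : TempChain A.T [(t, m)] (A.T + r8 sz + 32) := by
  have h4 := h.AR4
  rw [ht] at h4
  simp only [TempChain] at h4 ⊢
  refine ⟨h4.1, ?_⟩
  rw [hsz, h4.1]

/-- The cut point `p = L` of `arena_temp_restore`: every temp block is released. -/
theorem cut_all (h : ArenaOK A others mem f) : A.temps = A.temps ++ [] ∧ TempChain A.T A.temps A.L :=
  ⟨(List.append_nil _).symm, h.AR4⟩

/-! #### `vorbis_alloc` -/

/-- **`vorbis_alloc` = `setup_malloc(f, 1808)` succeeds at SD.12** (`S + 1808 + tmr + 64 ≤ T`: ARENA-FIX 1). -/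
theorem vorbis_alloc_fits (A : Arena) (tmr : Nat) (h : A.S + Off.sizeof.stb_vorbis + tmr + 64 ≤ A.T) :
    A.Fits Off.sizeof.stb_vorbis := by
  simp only [voff] at h ⊢
  unfold Arena.Fits
  rw [r8_of_mod 1808 (by decide)]
  omega

end ArenaOK

/-! ### 6. Decode time: `ADO` (ArenaDecodeOK) -/

/-- **ADO, ArenaDecodeOK** (INVARIANTS §2): the arena at a frame boundary: no temp block outstanding, `T = L`, and room for ONE temp
block of `tmr = f->temp_memory_required` bytes with its red zone. `S` is constant from `vorbis_alloc` on. -/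
structure ADO (A : Arena) (others : List Obj) (mem : Mem) (f : Nat) : Prop where
  ok : ArenaOK A others mem f
  idle : A.temps = []
  full : A.T = A.L
  tmr8 : stb_vorbis.temp_memory_required mem f % 8 = 0
  room : A.S + stb_vorbis.temp_memory_required mem f + 32 ≤ A.L

/-- **Inside a frame** (INVARIANTS §5): between `decode_residue`'s / `inverse_mdct`'s allocation and its `temp_alloc_restore`: ADO
weakened to ONE outstanding temp block of `n` bytes, `r8 n ≤ tmr`. -/
structure ADOBusy (A : Arena) (others : List Obj) (mem : Mem) (f : Nat) (n : Nat) : Prop where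
  ok : ArenaOK A others mem f
  one : A.temps = [(A.T, n)]
  size : r8 n ≤ stb_vorbis.temp_memory_required mem f
  tmr8 : stb_vorbis.temp_memory_required mem f % 8 = 0
  room : A.S + stb_vorbis.temp_memory_required mem f + 32 ≤ A.L

/-- **`temp_alloc_ok`: under ADO a temp allocation of `n` bytes with `r8 n ≤ tmr` SUCCEEDS** (the two unchecked decode-time
allocations: T3 bounds their requests by `tmr`, `r8_le_of_le` rounds), and the block it returns is a non-NULL temp block of the new
arena that shares no granule with any object that was live. -/
theorem temp_alloc_ok {A : Arena} {others : List Obj} {mem : Mem} {f : Nat} (h : ADO A others mem f) {n : Nat}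
    (hn : r8 n ≤ stb_vorbis.temp_memory_required mem f) :
    A.Fits n ∧ (A.pushTemp n).TBlock (A.B + (A.T - (r8 n + 32))) n ∧ A.B + (A.T - (r8 n + 32)) ≠ 0 ∧
      (∀ o', o' ∈ others → GranDisj (A.newTempObj n) o') := by
  have hfit : A.Fits n := by
    unfold Arena.Fits
    have := h.room
    have := h.full
    omega
  have h1 := h.ok.AR1
  exact ⟨hfit, A.tblock_pushTemp n, by omega, h.ok.newTemp_disj n hfit⟩

namespace ADO
variable {A : Arena} {others : List Obj} {mem mem' : Mem} {f : Nat}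

/-- **FRAME of ADO**: it reads `f->temp_memory_required` and the four arena fields. -/
theorem frame (h : ADO A others mem f) (hf : f + Off.sizeof.stb_vorbis ≤ 2 ^ 64)
    (hs : (Vorbis.Block.mk f Off.sizeof.stb_vorbis).Same mem mem') : ADO A others mem' f := by
  have e : stb_vorbis.temp_memory_required mem' f = stb_vorbis.temp_memory_required mem f := by
    simp only [vblock, voff] at hs hf
    simp only [vacc, voff]
    exact hs.u32 _ (by omega) (by omega) (by omega)
  refine ⟨h.ok.frame_obj hf hs, h.idle, h.full, ?_, ?_⟩
  · rw [e]
    exact h.tmr8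
  · rw [e]
    exact h.room

/-- **P5: ADO after `vorbis_alloc` and `*f = p`.** `h` is `ArenaOK` of the arena after `setup_malloc(&p, 1808)`, already moved to the
arena copy `f'` (`ArenaOK.move`); SD.12 gave `S + 1808 + tmr + 64 ≤ T = L` for the arena BEFORE the allocation. -/
theorem of_vorbis_alloc (h : ArenaOK (A.pushSetup Off.sizeof.stb_vorbis) others mem f) (hidle : A.temps = []) (hfull : A.T = A.L)
    (h8 : stb_vorbis.temp_memory_required mem f % 8 = 0)
    (hsd : A.S + Off.sizeof.stb_vorbis + stb_vorbis.temp_memory_required mem f + 64 ≤ A.T) :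
    ADO (A.pushSetup Off.sizeof.stb_vorbis) others mem f := by
  refine ⟨h, hidle, hfull, h8, ?_⟩
  show A.S + 32 + r8 Off.sizeof.stb_vorbis + stb_vorbis.temp_memory_required mem f + 32 ≤ A.L
  simp only [voff] at hsd ⊢
  rw [r8_of_mod 1808 (by decide)]
  omega

/-- **The decode-time allocation**: ADO, a request with `r8 n ≤ tmr` ⇒ after `setup_temp_malloc(f, n)` one block is outstanding. -/
theorem alloc (h : ADO A others mem f) {n : Nat} (hn : r8 n ≤ stb_vorbis.temp_memory_required mem f)
    (h5 : ArenaFields (A.pushTemp n) mem' f)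
    (htmr : stb_vorbis.temp_memory_required mem' f = stb_vorbis.temp_memory_required mem f) :
    ADOBusy (A.pushTemp n) (A.newTempObj n :: others) mem' f n := by
  have hfit := (temp_alloc_ok h hn).1
  refine ⟨h.ok.temp_malloc n hfit h5, ?_, ?_, ?_, ?_⟩
  · show (A.T - (r8 n + 32), n) :: A.temps = [(A.T - (r8 n + 32), n)]
    rw [h.idle]
  · rw [htmr]
    exact hn
  · rw [htmr]
    exact h.tmr8
  · rw [htmr]
    exact h.room

/-- Allocate, then restore: the ghost arena is what it was. -/
theorem roundtrip (h : ADO A others mem f) (n : Nat) : (A.pushTemp n).withTemp A.L [] = A := by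
  have e1 := h.idle
  have e2 := h.full
  unfold Arena.pushTemp Arena.withTemp
  cases A
  simp only at e1 e2
  simp only [Arena.mk.injEq, true_and]
  exact ⟨e2.symm, e1.symm⟩

end ADO

namespace ADOBusy
variable {A : Arena} {others : List Obj} {mem mem' : Mem} {f : Nat} {n : Nat}

/-- The outstanding block: `T = L - r8 n - 32`. -/
theorem T_eq (h : ADOBusy A others mem f n) : A.T + r8 n + 32 = A.L := by
  have h4 := h.ok.AR4
  rw [h.one] at h4
  simp only [TempChain] at h4
  exact h4.2

/-- The outstanding block is a temp block at `B + T` (what `temp_alloc` returned: every access of `buf2` / `part_classdata` is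
`tblock_acc` with it). -/
theorem tblock (h : ADOBusy A others mem f n) : A.TBlock (A.B + A.T) n := by
  refine ⟨A.T, ?_, rfl⟩
  rw [h.one]
  exact List.mem_cons_self

/-- FRAME of the busy state. -/
theorem frame (h : ADOBusy A others mem f n) (hf : f + Off.sizeof.stb_vorbis ≤ 2 ^ 64)
    (hs : (Vorbis.Block.mk f Off.sizeof.stb_vorbis).Same mem mem') : ADOBusy A others mem' f n := by
  have e : stb_vorbis.temp_memory_required mem' f = stb_vorbis.temp_memory_required mem f := by
    simp only [vblock, voff] at hs hf
    simp only [vacc, voff]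
    exact hs.u32 _ (by omega) (by omega) (by omega)
  refine ⟨h.ok.frame_obj hf hs, h.one, ?_, ?_, ?_⟩
  · rw [e]
    exact h.size
  · rw [e]
    exact h.tmr8
  · rw [e]
    exact h.room

/-- **`temp_alloc_restore(f, save)` with `save = L`** (the `temp_offset` read at the caller's entry, when ADO held): ADO again. -/
theorem restore (h : ADOBusy A others mem f n) (h5 : ArenaFields (A.withTemp A.L []) mem' f)
    (htmr : stb_vorbis.temp_memory_required mem' f = stb_vorbis.temp_memory_required mem f) :
    ADO (A.withTemp A.L []) (dropObjs [A.tempObj (A.T, n)] others) mem' f := by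
  have hd : TempChain A.T [(A.T, n)] A.L := by
    have h4 := h.ok.AR4
    rw [h.one] at h4
    exact h4
  have ht : A.temps = [(A.T, n)] ++ [] := by
    rw [h.one]
    rfl
  refine ⟨h.ok.temp_restore ht hd h5, rfl, rfl, ?_, ?_⟩
  · rw [htmr]
    exact h.tmr8
  · rw [htmr]
    exact h.room

end ADOBusy

/-! ### 7. The arena's setup blocks as THE block predicate `Blk` of the decoder layer (Vorbis/Blocks.lean)

INVARIANTS' `Block(p, n)` is `(p − B, n) ∈ A.setups`: every SHAPE clause of layer 3 is stated over an abstract `Blk : Block → Prop`;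
this is its instance for the arena ghost `A`. It is LAWFUL (`ArenaOK.blkOK`: in the data space, pairwise equal or disjoint — facts
that liveness alone does not give), its blocks are LIVE (`ArenaOK.blkLive`, whatever the present live list is), and it is
PERMANENT (`Arena.Blk.mono` over `Arena.Extends`, AR7): a SHAPE clause, once established, needs no re-derivation when a temp
block is freed or a frame is popped. A temp block, a stack object, the holes of `*f` are disjoint from every setup block
(`ArenaOK.blk_tblock_disjoint`, `ArenaOK.blk_off_stack`): a store there keeps every content block of the configuration. -/

/-- **INVARIANTS' `Block(p, n)` as a block predicate**: the block is one of the arena's setup blocks. -/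
def Arena.Blk (A : Arena) : Vorbis.Block → Prop := fun B => A.Block B.base B.size

/-- The two spellings. -/
theorem Arena.blk_iff (A : Arena) (p n : Nat) : A.Blk ⟨p, n⟩ ↔ A.Block p n := Iff.rfl

/-- **PERMANENCE (AR7)**: a setup block of an earlier arena is a setup block of every later one. This is the `hB` of every
group's `transfer` across an allocator call. -/
theorem Arena.Blk.mono {A A' : Arena} {B : Vorbis.Block} (h : A.Blk B) (he : A.Extends A') : A'.Blk B :=
  Arena.Block.mono h he

/-- The block `setup_malloc` just returned is allocated in the new arena. -/
theorem Arena.blk_pushSetup (A : Arena) (n : Nat) : (A.pushSetup n).Blk ⟨A.B + (A.S + 32), n⟩ :=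
  A.block_pushSetup n

namespace ArenaOK
variable {A : Arena} {others : List Obj} {mem mem' : Mem} {f : Nat}

/-- **The laws of `Blk` for the arena's setup blocks**: in the data space (AR1, AR1x, AR3), equal or disjoint (AR3: a red zone
lies between any two). -/
theorem blkOK (h : ArenaOK A others mem f) : BlkOK A.Blk := by
  constructor
  · intro B hB
    have := h.block_off hB
    omega
  · intro B C hB hC
    have hr1 := le_r8 B.size
    have hr2 := le_r8 C.size
    rcases h.block_apart hB hC with e | hlt | hgt
    · left
      cases B
      cases C
      simp only at e
      rw [e.1, e.2]
    · right
      simp only [vblock]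
      omega
    · right
      simp only [vblock]
      omega

/-- **An allocated block is live** (`block_live`), for any live list that contains `others`: the `hL` of every `site_…` lemma. -/
theorem blkLive (h : ArenaOK A others mem f) {objs : List Obj} (hsub : ∀ o, o ∈ others → o ∈ objs) :
    BlkLive A.Blk (Live objs) :=
  fun _ hB => h.block_live hsub hB

/-- **A check site inside a setup block**, as a `Site` (the result type of every USE lemma): `k` bytes at `a` inside `[p, p + n)`. -/
theorem site_block (h : ArenaOK A others mem f) {objs : List Obj} (hsub : ∀ o, o ∈ others → o ∈ objs) {p n : Nat}
    (hb : A.Block p n) {a k : Nat} (h1 : p ≤ a) (h2 : a + k ≤ p + n) (hk : 1 ≤ k) : Site (Live objs) a k :=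
  Site.of_block (h.block_live hsub hb) h1 h2 hk

/-- **A check site inside a temp block**, as a `Site`: decode_residue's `part_classdata`, inverse_mdct's `buf2` (a temp block is
not in the invariant's block predicate; its liveness comes from the arena layer). -/
theorem site_tblock (h : ArenaOK A others mem f) {objs : List Obj} (hsub : ∀ o, o ∈ others → o ∈ objs) {p n : Nat}
    (hb : A.TBlock p n) {a k : Nat} (h1 : p ≤ a) (h2 : a + k ≤ p + n) (hk : 1 ≤ k) : Site (Live objs) a k :=
  Site.of_block (h.tblock_live hsub hb) h1 h2 hk

/-- A setup block lies off the stack region `[700000H, 800000H)` (AR1x): no push, spill or stack-object store touches it. -/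
theorem blk_off_stack (h : ArenaOK A others mem f) {B : Vorbis.Block} (hB : A.Blk B) :
    B.base + B.size ≤ 0x700000 ∨ 0x800000 ≤ B.base :=
  (h.block_off hB).2.2

/-- **A setup block and a temp block are disjoint** (the free gap lies between them). -/
theorem blk_tblock_disjoint (h : ArenaOK A others mem f) {B : Vorbis.Block} (hB : A.Blk B) {q m : Nat} (hq : A.TBlock q m) :
    B.disjoint ⟨q, m⟩ :=
  h.block_tblock_disjoint hB hq

/-- **A store into a temp block keeps every setup block.** -/
theorem kept_of_store_tblock (h : ArenaOK A others mem f) {B : Vorbis.Block} (hB : A.Blk B) {q m : Nat} (hq : A.TBlock q m)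
    {b k : Nat} (v : Nat) (hb : (Vorbis.Block.mk q m).contains b k) : B.Kept mem (mem.writeLE (addr b) k v) := by
  have ht := h.tblock_off hq
  apply Vorbis.Block.Kept.of_writeLE mem b k v (h.blk_tblock_disjoint hB hq) hb
  · simp only []
    omega
  · exact h.blkOK.no_wrap hB

/-- **A footprint inside a temp block keeps every setup block** (a callee that writes the temp block only, the walker's
`SameExcept` of a batch of stores into it). -/
theorem allKept_of_tblock (h : ArenaOK A others mem f) {q m : Nat} (hq : A.TBlock q m) {ws : List Span}
    (hs : Mem.SameExcept ws mem mem') (hin : ∀ w, w ∈ ws → q ≤ w.lo ∧ w.hi ≤ q + m) : AllKept A.Blk mem mem' := by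
  apply AllKept.of_sameExcept h.blkOK hs
  intro B hB w hw
  have hd := h.blk_tblock_disjoint hB hq
  have := hin w hw
  simp only [vblock] at hd
  omega

/-- **A footprint inside the stack region keeps every setup block.** -/
theorem allKept_of_stack (h : ArenaOK A others mem f) {ws : List Span} (hs : Mem.SameExcept ws mem mem')
    (hin : ∀ w, w ∈ ws → 0x700000 ≤ w.lo ∧ w.hi ≤ 0x800000) : AllKept A.Blk mem mem' := by
  apply AllKept.of_sameExcept h.blkOK hs
  intro B hB w hw
  have hd := h.blk_off_stack hB
  have := hin w hw
  omega

end ArenaOK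

/-- After an error return of start_decoder the setup blocks are still live (all `vorbis_deinit`'s loads need). -/
theorem ArenaErr.blkLive {A : Arena} {others : List Obj} (h : ArenaErr A others) {objs : List Obj}
    (hsub : ∀ o, o ∈ others → o ∈ objs) : BlkLive A.Blk (Live objs) :=
  fun _ hB => h.block_live hsub hB

/-! ### 8. The two-address lemmas of the arena layer (the group "Arena / ADO" of the top-level invariant)

The arena layer reads only the 24 bytes `[f + 112, f + 136)` (AR5) and, for ADO, `temp_memory_required`; the rest is ghost. So it
follows the object wherever those windows go: through the struct copy `*f = p` (`ObjEq.of_copied`), over any store that leaves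
them alone (`ObjEq.of_sameExcept`). NOT over `ObjSame` / `DecodeSame`: those let `setup_offset` / `temp_offset` change — an
allocator call changes the ghost too, and is handled by the transition lemmas of section 5. -/

/-- The windows of `*f` that AR5 reads: `alloc_buffer`, `alloc_buffer_length_in_bytes`, `setup_offset`, `temp_offset`. -/
def ArenaFields.wins : Wins := [(112, 136)]

/-- The windows are the four fields. -/
example : ArenaFields.wins = [(Off.stb_vorbis.alloc, Off.stb_vorbis.temp_offset + 4)] := by
  simp only [voff, ArenaFields.wins]

/-- The windows of `*f` that ADO / ADOBusy read: `temp_memory_required` and the four fields of AR5. -/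
def ADO.wins : Wins := [(12, 16), (112, 136)]

/-- The windows are `temp_memory_required` and the four fields. -/
example : ADO.wins = [(Off.stb_vorbis.temp_memory_required, Off.stb_vorbis.temp_memory_required + 4),
    (Off.stb_vorbis.alloc, Off.stb_vorbis.temp_offset + 4)] := by
  simp only [voff, ADO.wins]

/-- **THE TWO-ADDRESS LEMMA of AR5**: the four fields of `(mem', f)` have the values of those of `(mem, p)`. -/
theorem ArenaFields.transfer {A : Arena} {mem mem' : Mem} {p f : Nat} (h : ArenaFields A mem p)
    (he : ObjEq ArenaFields.wins mem p mem' f) : ArenaFields A mem' f := by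
  obtain ⟨h1, h2, h3, h4⟩ := h
  simp only [vacc, voff] at h1 h2 h3 h4
  constructor
  · simp only [vacc, voff]
    rw [he.u64 112 (by decide)]
    exact h1
  · simp only [vacc, voff]
    rw [he.i32 120 (by decide)]
    exact h2
  · simp only [vacc, voff]
    rw [he.i32 128 (by decide)]
    exact h3
  · simp only [vacc, voff]
    rw [he.i32 132 (by decide)]
    exact h4

/-- **THE TWO-ADDRESS LEMMA of `ArenaOK`** (only AR5 reads memory). -/
theorem ArenaOK.transfer {A : Arena} {others : List Obj} {mem mem' : Mem} {p f : Nat} (h : ArenaOK A others mem p)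
    (he : ObjEq ArenaFields.wins mem p mem' f) : ArenaOK A others mem' f :=
  h.move (h.AR5.transfer he)

/-- **THE TWO-ADDRESS LEMMA of ADO.** -/
theorem ADO.transfer {A : Arena} {others : List Obj} {mem mem' : Mem} {p f : Nat} (h : ADO A others mem p)
    (he : ObjEq ADO.wins mem p mem' f) : ADO A others mem' f := by
  have e : stb_vorbis.temp_memory_required mem' f = stb_vorbis.temp_memory_required mem p := by
    simp only [vacc, voff]
    exact he.u32 12 (by decide)
  refine ⟨h.ok.transfer (he.sub (by decide)), h.idle, h.full, ?_, ?_⟩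
  · rw [e]
    exact h.tmr8
  · rw [e]
    exact h.room

/-- **THE TWO-ADDRESS LEMMA of ADOBusy.** -/
theorem ADOBusy.transfer {A : Arena} {others : List Obj} {mem mem' : Mem} {p f n : Nat} (h : ADOBusy A others mem p n)
    (he : ObjEq ADO.wins mem p mem' f) : ADOBusy A others mem' f n := by
  have e : stb_vorbis.temp_memory_required mem' f = stb_vorbis.temp_memory_required mem p := by
    simp only [vacc, voff]
    exact he.u32 12 (by decide)
  refine ⟨h.ok.transfer (he.sub (by decide)), h.one, ?_, ?_, ?_⟩
  · rw [e]
    exact h.size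
  · rw [e]
    exact h.tmr8
  · rw [e]
    exact h.room

/-- The arena layer follows the struct copy `*f = p`. -/
theorem ADO.moves {A : Arena} {others : List Obj} {mem mem' : Mem} {p f : Nat}
    (hc : Copied mem p mem' f Off.sizeof.stb_vorbis) (h : ADO A others mem p) : ADO A others mem' f :=
  h.transfer (ObjEq.of_copied hc (by decide))

/-- The arena layer follows the struct copy `*f = p`. -/
theorem ArenaOK.moves {A : Arena} {others : List Obj} {mem mem' : Mem} {p f : Nat}
    (hc : Copied mem p mem' f Off.sizeof.stb_vorbis) (h : ArenaOK A others mem p) : ArenaOK A others mem' f :=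
  h.transfer (ObjEq.of_copied hc (by decide))

/-- **ADO over a batch of decode-time stores that do not touch `temp_memory_required` and the four arena fields** (every
decode-time function except the two that allocate: their footprint in `*f` is inside the OTHER holes of `DecodeSame`). -/
theorem ADO.frame_stores {A : Arena} {others : List Obj} {mem mem' : Mem} {f : Nat} (h : ADO A others mem f)
    {spans : List Span} (hs : Mem.SameExcept spans mem mem') (hf : f + Off.sizeof.stb_vorbis ≤ 2 ^ 64)
    (hd : ∀ s, s ∈ spans → s.hi ≤ f + 112 ∨ f + 136 ≤ s.lo)
    (hd' : ∀ s, s ∈ spans → s.hi ≤ f + 12 ∨ f + 16 ≤ s.lo) : ADO A others mem' f := by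
  apply h.transfer
  simp only [voff] at hf
  apply ObjEq.of_sameExcept hs
  · intro w hw
    simp only [ADO.wins, List.mem_cons, List.mem_nil_iff, or_false] at hw
    rcases hw with rfl | rfl <;> simp only [] <;> omega
  · intro w hw s hsp
    have h1 := hd s hsp
    have h2 := hd' s hsp
    simp only [ADO.wins, List.mem_cons, List.mem_nil_iff, or_false] at hw
    rcases hw with rfl | rfl <;> simp only [] <;> omega

/-! ### 9. THE AGES OF THE BLOCKS: ghost snapshots of the arena, `Since`

`setup_malloc` never releases and never reuses: the setup blocks of the arena only get MORE (`Arena.Extends`, AR7). A ghost SNAPSHOT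
is simply an earlier value `A'` of the ghost arena (`A'.Extends A`); `A'.Blk` are the blocks that existed at the snapshot, and
`Since A' A` the blocks of `A` allocated after it. WHY: two setup blocks are the same block or disjoint (`ArenaOK.blkOK`), so to
show that a store into a block UNDER CONSTRUCTION keeps a block the invariant READS one needs that they are DIFFERENT blocks — and
that is known only at the allocating call (`ArenaOK.since_pushSetup`: the block `setup_malloc` returns is no block of the arena
before the call). An assertion that states everything over the current `A.Blk` forgets it at the next cut point; an assertion that
states the finished things over `A'.Blk` and the things under construction over `Since A' A` keeps it:

      Since.ne_old / Since.ne_since                    an older block is not a younger block                      (pure logic)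
      ArenaOK.old_disjoint_since / since_disjoint_since   … hence they are disjoint                                (AR3)
      ArenaOK.kept_of_store_since / allKept_of_store_since / allKept_of_since
                                                       a store (a callee's footprint) inside a younger block keeps every block of the snapshot
      ArenaOK.kept_of_store_later / kept_of_store_old  … keeps a block of the period before / the other direction: a store inside a
                                                       block of the snapshot keeps every younger block
      ArenaOK.objEq_of_store_blk                       a store inside a setup block leaves an object outside the arena's buffer (`*p`) alone
      ArenaOK.since_pushSetup                          ESTABLISH: the block `setup_malloc` just returned is `Since A (A.pushSetup n)`
      Since.mono / Since.older / Since.blk             the arena grew / an earlier snapshot / forget the age -/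

/-- **The blocks allocated after the snapshot `A'`**: the setup blocks of the arena `A` that are no setup blocks of `A'`. -/
def Since (A' A : Arena) : Vorbis.Block → Prop := fun B => A.Blk B ∧ ¬ A'.Blk B

namespace Since
variable {A₀ A' A A₂ : Arena} {B C : Vorbis.Block}

/-- A block allocated since `A'` is a block of the arena. -/
theorem blk (h : Since A' A B) : A.Blk B := h.1

/-- A block allocated since `A'` was no block of `A'`. -/
theorem fresh (h : Since A' A B) : ¬ A'.Blk B := h.2

/-- A block allocated since `A'` is still one in a later arena. -/
theorem mono (h : Since A' A B) (he : A.Extends A₂) : Since A' A₂ B :=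
  ⟨h.1.mono he, h.2⟩

/-- A block allocated since `A'` was allocated since every EARLIER snapshot `A₀` too. -/
theorem older (h : Since A' A B) (he : A₀.Extends A') : Since A₀ A B :=
  ⟨h.1, fun h0 => h.2 (h0.mono he)⟩

/-- **A block of the snapshot is not a block allocated after it.** -/
theorem ne_old (hB : A'.Blk B) (hC : Since A' A C) : B ≠ C := by
  intro e
  rw [e] at hB
  exact hC.2 hB

/-- **Blocks allocated in two consecutive periods are different blocks**: `B` between the snapshots `A₀` and `A'`, `C` after `A'`. -/
theorem ne_since (hB : Since A₀ A' B) (hC : Since A' A C) : B ≠ C :=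
  ne_old hB.1 hC

/-- Nothing was allocated since the present arena. -/
theorem not_self : ¬ Since A A B := fun h => h.2 h.1

end Since

/-- Two different blocks of the arena are disjoint (AR3: a red zone lies between them). -/
theorem arena_disjoint {A : Arena} {others : List Obj} {mem : Mem} {f : Nat} (ha : ArenaOK A others mem f) {B C : Vorbis.Block}
    (hB : A.Blk B) (hC : A.Blk C) (hne : B ≠ C) : B.disjoint C :=
  ha.blkOK.disjoint hB hC hne

/-- A block of the arena lies inside the arena's buffer. -/
theorem arena_inside {A : Arena} {others : List Obj} {mem : Mem} {f : Nat} (ha : ArenaOK A others mem f) {B : Vorbis.Block}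
    (hB : A.Blk B) : A.B ≤ B.base ∧ B.base + B.size ≤ A.B + A.L := by
  have hr := ha.block_range hB
  have hb := ha.bounds
  have hl := le_r8 B.size
  omega

namespace ArenaOK
variable {A A' A₀ : Arena} {others : List Obj} {mem mem' : Mem} {f : Nat} {B C : Vorbis.Block}

/-- **ESTABLISH: the block `setup_malloc(f, n)` just returned was allocated since the arena `A` of before the call** — it is a
block of `A.pushSetup n` (`Arena.blk_pushSetup`) and no block of `A` (every block of `A` ends at or below `B + S`, AR3; the new
one starts at `B + S + 32`). `h` is the ArenaOK of BEFORE the call. -/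
theorem since_pushSetup (h : ArenaOK A others mem f) (n : Nat) : Since A (A.pushSetup n) ⟨A.B + (A.S + 32), n⟩ := by
  refine ⟨A.blk_pushSetup n, ?_⟩
  intro hold
  have hr := h.block_range hold
  have hl := le_r8 n
  simp only [] at hr
  omega

/-- **A block of the snapshot and a block allocated after it are disjoint.** `h` is the ArenaOK of the PRESENT arena. -/
theorem old_disjoint_since (h : ArenaOK A others mem f) (he : A'.Extends A) (hB : A'.Blk B) (hC : Since A' A C) :
    B.disjoint C :=
  arena_disjoint h (hB.mono he) hC.1 (Since.ne_old hB hC)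

/-- **Blocks allocated in two consecutive periods are disjoint.** -/
theorem since_disjoint_since (h : ArenaOK A others mem f) (he : A'.Extends A) (hB : Since A₀ A' B) (hC : Since A' A C) :
    B.disjoint C :=
  h.old_disjoint_since he hB.1 hC

/-- The blocks allocated since a snapshot are a lawful block predicate. -/
theorem since_blkOK (h : ArenaOK A others mem f) (A' : Arena) : BlkOK (Since A' A) :=
  h.blkOK.sub (fun _ hB => hB.1)

/-- **A STORE INSIDE A BLOCK UNDER CONSTRUCTION KEEPS EVERY BLOCK OF THE SNAPSHOT**: `C` was allocated after the snapshot `A'`,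
the `k` bytes at `b` lie inside `C`. -/
theorem kept_of_store_since (h : ArenaOK A others mem f) (he : A'.Extends A) (hB : A'.Blk B) (hC : Since A' A C) {b k : Nat}
    (v : Nat) (hin : C.contains b k) : B.Kept mem (mem.writeLE (addr b) k v) :=
  h.blkOK.kept_store (hB.mono he) hC.1 (Since.ne_old hB hC) mem v hin

/-- The same for all blocks of the snapshot at once: the `hk` of the frame lemmas of a record stated over `A'.Blk`. -/
theorem allKept_of_store_since (h : ArenaOK A others mem f) (he : A'.Extends A) (hC : Since A' A C) {b k : Nat} (v : Nat)
    (hin : C.contains b k) : AllKept A'.Blk mem (mem.writeLE (addr b) k v) :=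
  fun _ hB => h.kept_of_store_since he hB hC v hin

/-- **A footprint inside a block under construction keeps every block of the snapshot** (a callee that writes the new table only:
memset, memcpy, compute_codewords …; the walker's `SameExcept` of a batch of stores into it). -/
theorem allKept_of_since (h : ArenaOK A others mem f) (he : A'.Extends A) (hC : Since A' A C) {ws : List Span}
    (hs : Mem.SameExcept ws mem mem') (hin : ∀ w, w ∈ ws → C.base ≤ w.lo ∧ w.hi ≤ C.base + C.size) :
    AllKept A'.Blk mem mem' := by
  intro B hB
  apply Block.Kept.of_sameExcept hs
  · intro w hw
    have hd := h.old_disjoint_since he hB hC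
    have := hin w hw
    simp only [vblock] at hd
    omega
  · exact h.blkOK.no_wrap (hB.mono he)

/-- **A store inside a block allocated in a LATER period keeps a block allocated in an earlier one** (two tables of the element
under construction: the older is read while the younger is filled). -/
theorem kept_of_store_later (h : ArenaOK A others mem f) (he : A'.Extends A) (hB : Since A₀ A' B) (hC : Since A' A C)
    {b k : Nat} (v : Nat) (hin : C.contains b k) : B.Kept mem (mem.writeLE (addr b) k v) :=
  h.kept_of_store_since he hB.1 hC v hin

/-- **A store inside a block OF THE SNAPSHOT keeps every block allocated after it** (the other direction: a field of the element
under construction, which lies in an old block — the codebooks block, `residue_config`, `mapping` — is stored while its young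
tables are read). -/
theorem kept_of_store_old (h : ArenaOK A others mem f) (he : A'.Extends A) (hB : Since A' A B) (hC : A'.Blk C) {b k : Nat}
    (v : Nat) (hin : C.contains b k) : B.Kept mem (mem.writeLE (addr b) k v) :=
  h.blkOK.kept_store hB.1 (hC.mono he) (Since.ne_old hC hB).symm mem v hin

/-- **A store inside a setup block leaves an object outside the arena's buffer alone** (the decoder object `*p` while it is a stack
object of stb_vorbis_open_memory: `hout`): whatever windows of it a clause reads, they read the same. -/
theorem objEq_of_store_blk (h : ArenaOK A others mem f) (hC : A.Blk C) {b k : Nat} (v : Nat) (hin : C.contains b k) {p : Nat}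
    (hout : p + Off.sizeof.stb_vorbis ≤ A.B ∨ A.B + A.L ≤ p) (hp : p + Off.sizeof.stb_vorbis ≤ 2 ^ 64) {ws : Wins}
    (hw : WinsBelow ws Off.sizeof.stb_vorbis) : ObjEq ws mem p (mem.writeLE (addr b) k v) p := by
  have hi := arena_inside h hC
  have hb := h.bounds
  simp only [vblock] at hin
  simp only [voff] at hout hp
  have hbl : b < 2 ^ 64 := by omega
  have eb : (addr b).toNat = b := toNat_addr b hbl
  apply ObjEq.of_writeLE
  · rw [eb]
    omega
  · intro w hw'
    have := hw w hw'
    simp only [voff] at this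
    omega
  · intro w hw'
    have := hw w hw'
    simp only [voff] at this
    rw [eb]
    omega

end ArenaOK

end Vorbis
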